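-- pv_equiv track=rewrite | github.com/Systemofalam/Advent_of_code_2026 | Day06/Day06.py | part1
-- ===== SOURCE A (Python) =====
-- from math import prod
--
-- def blocks(g):
--     h, w = len(g), len(g[0])
--     empty = [all(g[r][c] == " " for r in range(h)) for c in range(w)]
--     res, on = [], False
--     for c in range(w):
--         if not empty[c] and not on:
--             on, start = True, c
--         elif empty[c] and on:
--             on = False
--             res.append((start, c - 1))
--     if on:
--         res.append((start, w - 1))
--     return res
--
-- def part1(g):
--     h = len(g)
--     total = 0
--     for a, b in blocks(g):
--         op = "+" if "+" in g[-1][a:b+1] else "*"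
--         nums = [int(g[r][a:b+1].strip()) for r in range(h - 1) if g[r][a:b+1].strip()]
--         total += sum(nums) if op == "+" else prod(nums)
--     return total
-- ===== SOURCE B (Python) =====
-- from math import prod
--
-- def part1(g):
--     h, w = len(g), len(g[0])
--     # tokenize: every maximal run of non-space characters of every row (clipped to the
--     # grid width), as (start_col, end_col, row, text)
--     toks = []
--     for r in range(h):
--         row = g[r][:w]
--         i, n = 0, len(row)
--         while i < n:
--             if row[i] == " ":
--                 i += 1
--             else:
--                 j = i
--                 while j < n and row[j] != " ":
--                     j += 1
--                 toks.append((i, j - 1, r, row[i:j]))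
--                 i = j
--     toks.sort(key=lambda t: t[0])
--     # the blocks are the connected components of the token intervals: sort-and-merge
--     blocks = []
--     for s, e, _, _ in toks:
--         if blocks and s <= blocks[-1][1] + 1:
--             blocks[-1][1] = max(blocks[-1][1], e)
--         else:
--             blocks.append([s, e])
--     total = 0
--     for a, b in blocks:
--         nums = [int(t) for s, _, r, t in toks if r < h - 1 and a <= s <= b and t.strip()]
--         plus = any("+" in t for s, _, r, t in toks if r == h - 1 and a <= s <= b)
--         total += sum(nums) if plus else prod(nums)
--     return total
-- ===== Notes on version B (the rewrite author's own statement) =====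
-- stated objective: alternative
-- what changed: B never builds A's per-column blank mask or runs A's on/start state machine and never re-slices the rows: it tokenizes each row once into (start,end,text) runs of non-space characters, sorts all tokens by start column and merges their intervals into connected components (the blocks), then sums or multiplies directly over the tokens that fall inside each block.
-- outside the precondition, e.g. on part1(['21', '', '', ' 11 ']): A returns 21, B returns 21; on part1(['1 2', '']): A raises IndexError, B returns 3
import Mathlib
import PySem

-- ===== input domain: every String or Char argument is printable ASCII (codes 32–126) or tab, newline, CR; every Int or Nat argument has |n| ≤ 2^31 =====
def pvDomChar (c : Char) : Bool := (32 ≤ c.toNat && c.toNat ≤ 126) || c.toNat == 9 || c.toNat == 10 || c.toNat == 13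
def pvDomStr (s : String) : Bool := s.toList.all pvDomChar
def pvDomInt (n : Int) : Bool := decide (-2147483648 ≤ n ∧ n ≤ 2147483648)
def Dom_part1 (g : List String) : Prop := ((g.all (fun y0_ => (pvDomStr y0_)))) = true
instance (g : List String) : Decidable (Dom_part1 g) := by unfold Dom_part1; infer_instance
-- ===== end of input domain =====

-- B finds the blocks by sorting and merging the per-row token intervals (connected
-- components) and aggregates straight over the tokens, instead of A's per-column blank
-- mask + on/start state machine followed by re-slicing every row (objective: alternative).

-- ===== PORT A =====
-- literal port of A; rows are handled as List Char throughout (String.toList once at entry)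
def part1 (g : List String) : Int :=
  let rows := g.map String.toList
  let h := rows.length
  let w := (rows.headD []).length            -- len(g[0]); g = [] raises IndexError, excluded by Pre_
  -- empty = [all(g[r][c] == " " for r in range(h)) for c in range(w)]
  -- (g[r][c] ported as getD with default ' ': a short row raises IndexError in Python, excluded by Pre_)
  let empty : List Bool := (List.range w).map (fun c => rows.all (fun r => r.getD c ' ' == ' '))
  -- state (res, on, start); Python's unset 'start' is carried as 0 (never read before first assignment)
  let st := (List.range w).foldl (fun (st : List (Nat × Nat) × Bool × Nat) c =>
      if !(empty.getD c false) && !st.2.1 then (st.1, true, c)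
      else if empty.getD c false && st.2.1 then (st.1 ++ [(st.2.2, c - 1)], false, st.2.2)
      else st) ([], false, 0)
  let blocks := if st.2.1 then st.1 ++ [(st.2.2, w - 1)] else st.1
  blocks.foldl (fun total ab =>
      let last := (PySem.List.pyGet? rows (-1)).getD []       -- g[-1]; g ≠ [] under Pre_
      -- '"+" in s' for the one-character string "+" is membership of the character
      let op : Bool := ('+' ∈ PySem.List.slice last (some (ab.1 : Int)) (some ((ab.2 : Int) + 1)))
      let nums : List Int := (List.range (h - 1)).filterMap (fun r =>
        let s := PySem.Chars.strip (PySem.List.slice (rows.getD r []) (some (ab.1 : Int)) (some ((ab.2 : Int) + 1)))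
        if s.isEmpty then none else some ((PySem.Int.ofChars? s).getD 0))  -- int() ValueError excluded by Pre_
      total + (if op then nums.sum else nums.prod)) 0

-- ===== PORT B =====
-- tokenizer: the inner while-loops of B, over one row; a token is (start, end, row, text)
def pvScan (r i : Nat) (cs : List Char) : List (Nat × Nat × Nat × List Char) :=
  match cs with
  | [] => []
  | c :: rest =>
    if c = ' ' then pvScan r (i + 1) rest
    else
      let tk := (c :: rest).takeWhile (fun ch => ch ≠ ' ')
      (i, i + tk.length - 1, r, tk) ::
        pvScan r (i + tk.length) ((c :: rest).dropWhile (fun ch => ch ≠ ' '))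
termination_by cs.length
decreasing_by
  · simp
  · rename_i hc
    simp only [List.length_cons]
    rw [List.dropWhile_cons_of_pos (by simpa using hc)]
    exact Nat.lt_succ_of_le (List.length_dropWhile_le _ _)

-- B's outer tokenizing loop over the rows
def pvToks (r : Nat) (rows : List (List Char)) : List (Nat × Nat × Nat × List Char) :=
  match rows with
  | [] => []
  | row :: rest => pvScan r 0 row ++ pvToks (r + 1) rest

-- one step of B's interval merge; Python appends to / mutates the END of `blocks`,
-- ported as the HEAD of a reversed list (reversed back before use)
def pvMergeStep (bs : List (Nat × Nat)) (t : Nat × Nat × Nat × List Char) : List (Nat × Nat) :=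
  match bs with
  | [] => [(t.1, t.2.1)]
  | (s0, e0) :: rest =>
    if t.1 ≤ e0 + 1 then (s0, max e0 t.2.1) :: rest else (t.1, t.2.1) :: (s0, e0) :: rest

def part1_alt (g : List String) : Int :=
  let h := g.length
  let w := (g.headD "").toList.length        -- len(g[0]); g = [] raises IndexError, excluded by Pre_
  let toks := PySem.List.sorted (pvToks 0 (g.map (fun s => s.toList.take w))) (fun t => t.1) false
  let blocks := (toks.foldl pvMergeStep []).reverse
  blocks.foldl (fun total ab =>
    let nums : List Int := toks.filterMap (fun t =>
      if t.2.2.1 < h - 1 && ab.1 ≤ t.1 && t.1 ≤ ab.2 && !(PySem.Chars.strip t.2.2.2).isEmpty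
      then some ((PySem.Int.ofChars? t.2.2.2).getD 0) else none)   -- int() ValueError excluded by Pre_
    let plus := toks.any (fun t =>
      t.2.2.1 == h - 1 && decide (ab.1 ≤ t.1) && decide (t.1 ≤ ab.2) && decide ('+' ∈ t.2.2.2))
    total + (if plus then nums.sum else nums.prod)) 0

-- ===== PRECONDITION & SPEC =====
def pvColBlank (g : List String) (c : Nat) : Bool := g.all (fun s => s.toList.getD c ' ' == ' ')

-- a ≤ b is a block of g iff its columns are a maximal run of non-blank columns
def pvIsBlock (g : List String) (a b : Nat) : Bool :=
  let w := (g.headD "").toList.length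
  decide (a ≤ b) && decide (b < w) &&
  (List.range w).all (fun c => !(decide (a ≤ c) && decide (c ≤ b)) || !pvColBlank g c) &&
  (decide (a = 0) || pvColBlank g (a - 1)) &&
  (decide (b = w - 1) || pvColBlank g (b + 1))

-- every non-empty stripped block slice of a non-last row parses as a Python int literal
def pvParseOK (g : List String) : Bool :=
  let w := (g.headD "").toList.length
  (List.range w).all fun a => (List.range w).all fun b =>
    !pvIsBlock g a b ||
    g.dropLast.all (fun s =>
      let t := PySem.Chars.strip ((s.toList.drop a).take (b + 1 - a))
      t.isEmpty || (PySem.Int.ofChars? t).isSome)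

-- no non-last row holds, inside one block, two non-whitespace characters separated by a
-- space character (there int() on the stripped joined cell keeps that inner space and
-- raises ValueError, so A never returns; stated separately because it is what the proof uses)
def pvNoSplit (g : List String) : Bool :=
  let w := (g.headD "").toList.length
  (List.range w).all fun a => (List.range w).all fun b =>
    !pvIsBlock g a b ||
    g.dropLast.all (fun s =>
      let row := s.toList
      (List.range w).all fun m =>
        !(decide (a ≤ m) && decide (m ≤ b) && (row.getD m ' ' == ' ')
          && ((List.range m).any fun p => decide (a ≤ p) && !PySem.Chars.isspace (row.getD p ' '))
          && ((List.range (b + 1)).any fun q => decide (m < q) && !PySem.Chars.isspace (row.getD q ' '))))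

-- Pre_ excludes (i) the empty grid and ragged grids with a row shorter than the first row —
-- there A's short-circuiting all() usually raises IndexError, and where it happens to return
-- the value would have to be matched through A's accidental evaluation order — and
-- (ii) grids where some stripped block cell is not a valid int literal, on which A raises
-- ValueError (pvNoSplit is one consequence of that, spelled out).
def Pre_part1 (g : List String) : Prop :=
  g ≠ [] ∧ (∀ s ∈ g, (g.headD "").toList.length ≤ s.toList.length) ∧
    pvParseOK g = true ∧ pvNoSplit g = true
instance (g : List String) : Decidable (Pre_part1 g) := by unfold Pre_part1; infer_instance

def pvWitness_part1 : List String := ["1 2", "3 4", "+ *"]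

def Spec_part1 (g : List String) (out : Int) : Prop := out = part1_alt g
instance (g : List String) (out : Int) : Decidable (Spec_part1 g out) := by unfold Spec_part1; infer_instance

-- ===== CLAIM (what is proved, stated in full; the proofs are below) =====
def Claim_equal_part1 : Prop := ∀ (g : List String), Dom_part1 g → Pre_part1 g → Spec_part1 g (part1 g)

-- ===== LEMMAS AND PROOFS =====


-- dropWhile is drop of the takeWhile length
theorem pv_dropWhile_eq_drop {α : Type} (p : α → Bool) (l : List α) :
    l.dropWhile p = l.drop (l.takeWhile p).length := by
  have h := List.takeWhile_append_dropWhile (p := p) (l := l)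
  calc l.dropWhile p = (l.takeWhile p ++ l.dropWhile p).drop (l.takeWhile p).length :=
        List.drop_left.symm
    _ = l.drop (l.takeWhile p).length := by rw [h]

theorem pv_getD_drop {α : Type} (l : List α) (i j : Nat) (d : α) :
    (l.drop i).getD j d = l.getD (i + j) d := by
  simp [List.getD_eq_getElem?_getD, List.getElem?_drop]

theorem pv_getD_take {α : Type} (l : List α) (n j : Nat) (d : α) (h : j < n) :
    (l.take n).getD j d = l.getD j d := by
  simp [List.getD_eq_getElem?_getD, h]

theorem pv_dropWhile_head_false {α : Type} (p : α → Bool) :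
    ∀ (l res : List α) (x : α), l.dropWhile p = x :: res → p x = false := by
  intro l
  induction l with
  | nil => intro res x h; simp at h
  | cons a l ih =>
    intro res x h
    by_cases hp : p a
    · rw [List.dropWhile_cons_of_pos hp] at h
      exact ih res x h
    · rw [List.dropWhile_cons_of_neg hp] at h
      cases h
      simpa using hp

-- char-level specification of B's tokenizer: membership, coverage, separation
theorem pv_scan_spec (row : List Char) (r : Nat) : ∀ (n i : Nat), row.length - i ≤ n →
    (∀ t ∈ pvScan r i (row.drop i),
       t.2.2.1 = r ∧ i ≤ t.1 ∧ t.1 ≤ t.2.1 ∧ t.2.1 < row.length ∧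
       t.2.2.2 = (row.drop t.1).take (t.2.1 + 1 - t.1) ∧
       (∀ c, t.1 ≤ c → c ≤ t.2.1 → ¬ row.getD c ' ' = ' ') ∧
       (t.1 = i ∨ row.getD (t.1 - 1) ' ' = ' ')) ∧
    (∀ p, i ≤ p → p < row.length → ¬ row.getD p ' ' = ' ' →
       ∃ t ∈ pvScan r i (row.drop i), t.1 ≤ p ∧ p ≤ t.2.1) ∧
    (pvScan r i (row.drop i)).Pairwise (fun t u => t.2.1 + 1 < u.1) := by
  intro n
  induction n with
  | zero =>
    intro i hn
    have hd : row.drop i = [] := List.drop_eq_nil_iff.mpr (by omega)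
    rw [hd]
    refine ⟨by simp [pvScan], ?_, by simp [pvScan]⟩
    intro p hp1 hp2 _
    omega
  | succ n ih =>
    intro i hn
    rcases hd : row.drop i with _ | ⟨c, rest⟩
    · refine ⟨by simp [pvScan], ?_, by simp [pvScan]⟩
      intro p hp1 hp2 _
      rw [List.drop_eq_nil_iff] at hd
      omega
    · have hilt : i < row.length := by
        have := congrArg List.length hd
        simp at this
        omega
      have hci : row.getD i ' ' = c := by
        have h0 : (row.drop i).getD 0 ' ' = c := by rw [hd]; rfl
        rw [pv_getD_drop] at h0
        simpa using h0
      have hrest : row.drop (i + 1) = rest := by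
        have : (row.drop i).drop 1 = rest := by rw [hd]; rfl
        rwa [List.drop_drop] at this
      by_cases hc : c = ' '
      · -- space: skip
        have hscan : pvScan r i (c :: rest) = pvScan r (i + 1) (row.drop (i + 1)) := by
          rw [pvScan, if_pos hc, hrest]
        obtain ⟨ihm, ihc, ihp⟩ := ih (i + 1) (by omega)
        rw [hscan]
        refine ⟨?_, ?_, ihp⟩
        · intro t ht
          obtain ⟨h1, h2, h3, h4, h5, h6, h7⟩ := ihm t ht
          refine ⟨h1, by omega, h3, h4, h5, h6, ?_⟩
          rcases h7 with h7 | h7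
          · right; rw [h7]; simpa [hc] using hci
          · right; exact h7
        · intro p hp1 hp2 hp3
          have hip : i + 1 ≤ p := by
            rcases Nat.eq_or_lt_of_le hp1 with h | h
            · exfalso; apply hp3; rw [← h, hci, hc]
            · omega
          exact ihc p hip hp2 hp3
      · -- token
        set tk := (row.drop i).takeWhile (fun ch => ch ≠ ' ') with htk
        have htkcons : (c :: rest).takeWhile (fun ch => decide (ch ≠ ' ')) = tk := by
          rw [htk, hd]
        have htkpos : 0 < tk.length := by
          rw [htk, hd, List.takeWhile_cons_of_pos (by simpa using hc)]
          simp
        have htktake : tk = (row.drop i).take tk.length := by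
          rw [htk]
          exact List.prefix_iff_eq_take.mp (List.takeWhile_prefix _)
        have htkle : tk.length ≤ row.length - i := by
          have h1 := (List.takeWhile_prefix (l := row.drop i) (fun ch => decide (ch ≠ ' '))).length_le
          rw [← htk, List.length_drop] at h1
          exact h1
        have hchars : ∀ k, k < tk.length → ¬ row.getD (i + k) ' ' = ' ' := by
          intro k hk
          have hmem : row.getD (i + k) ' ' ∈ tk := by
            have : tk[k]? = some (row.getD (i + k) ' ') := by
              rw [htktake]
              rw [List.getElem?_take, if_pos hk, List.getElem?_drop]
              rw [List.getD_eq_getElem?_getD, List.getElem?_eq_getElem (by omega)]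
              simp
            exact List.mem_of_getElem? this
          have := List.mem_takeWhile_imp (htk ▸ hmem)
          simpa using this
        have hdw : (c :: rest).dropWhile (fun ch => decide (ch ≠ ' ')) = row.drop (i + tk.length) := by
          rw [← hd, pv_dropWhile_eq_drop, ← htk, List.drop_drop, Nat.add_comm]
        have hnext : i + tk.length = row.length ∨ row.getD (i + tk.length) ' ' = ' ' := by
          rcases hdd : row.drop (i + tk.length) with _ | ⟨x, xs⟩
          · left
            rw [List.drop_eq_nil_iff] at hdd
            omega
          · right
            have h1 : (c :: rest).dropWhile (fun ch => decide (ch ≠ ' ')) = x :: xs := by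
              rw [hdw, hdd]
            have h2 := pv_dropWhile_head_false _ _ _ _ h1
            simp at h2
            have hx : row.getD (i + tk.length) ' ' = x := by
              have h0 : (row.drop (i + tk.length)).getD 0 ' ' = x := by rw [hdd]; rfl
              rw [pv_getD_drop] at h0
              simpa using h0
            exact hx.trans h2
        have hscan : pvScan r i (c :: rest)
            = (i, i + tk.length - 1, r, tk) :: pvScan r (i + tk.length) (row.drop (i + tk.length)) := by
          rw [pvScan, if_neg hc, htkcons, hdw]
        obtain ⟨ihm, ihc, ihp⟩ := ih (i + tk.length) (by omega)
        -- a token of the tail scan never starts at i + tk.length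
        have hnotstart : ∀ t ∈ pvScan r (i + tk.length) (row.drop (i + tk.length)), i + tk.length < t.1 := by
          intro t ht
          obtain ⟨_, h2, h3, h4, _, h6, _⟩ := ihm t ht
          rcases Nat.eq_or_lt_of_le h2 with he | he
          · exfalso
            rcases hnext with hx | hx
            · omega
            · exact h6 t.1 le_rfl h3 (by rw [← he]; exact hx)
          · exact he
        rw [hscan]
        refine ⟨?_, ?_, ?_⟩
        · intro t ht
          rcases List.mem_cons.mp ht with rfl | ht
          · refine ⟨rfl, le_rfl, by simp; omega, by simp; omega, ?_, ?_, Or.inl rfl⟩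
            · show tk = _
              rw [htktake]
              congr 1
              simp
              omega
            · intro cc h1 h2
              simp at h1 h2
              have : cc - i < tk.length := by omega
              have := hchars (cc - i) this
              rwa [Nat.add_sub_cancel' h1] at this
          · obtain ⟨h1, h2, h3, h4, h5, h6, h7⟩ := ihm t ht
            refine ⟨h1, by omega, h3, h4, h5, h6, ?_⟩
            right
            rcases h7 with h7 | h7
            · exact absurd (h7 ▸ (hnotstart t ht)) (by omega)
            · exact h7
        · intro p hp1 hp2 hp3
          by_cases hple : p < i + tk.length
          · exact ⟨(i, i + tk.length - 1, r, tk), List.mem_cons_self, by simp; omega, by simp; omega⟩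
          · obtain ⟨t, ht, hcov⟩ := ihc p (by omega) hp2 hp3
            exact ⟨t, List.mem_cons_of_mem _ ht, hcov⟩
        · refine List.pairwise_cons.mpr ⟨?_, ihp⟩
          intro u hu
          have := hnotstart u hu
          simp
          omega


-- g[-1] for a nonempty list is the last element
theorem pv_pyGet_last (l : List (List Char)) (hl : l ≠ []) :
    (PySem.List.pyGet? l (-1)).getD [] = l.getD (l.length - 1) [] := by
  have h0 : 0 < l.length := List.length_pos_iff.mpr hl
  simp only [PySem.List.pyGet?, PySem.List.pyIdx?]
  rw [if_neg (by norm_num), if_pos (by omega)]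
  simp [List.getD_eq_getElem?_getD]

def pvBlankCol (c : List Char) : Bool := c.all (· == ' ')

-- the on/start state machine of A, as a recursion over the mask with the running column index
def pvGo (i : Nat) (ms : List Bool) (st : List (Nat × Nat) × Bool × Nat) : List (Nat × Nat) :=
  match ms with
  | [] => if st.2.1 then st.1 ++ [(st.2.2, i - 1)] else st.1
  | m :: ms' =>
      pvGo (i + 1) ms'
        (if !m && !st.2.1 then (st.1, true, i)
         else if m && st.2.1 then (st.1 ++ [(st.2.2, i - 1)], false, st.2.2)
         else st)

-- the maximal runs of non-blank columns, with their absolute index ranges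
def pvRuns (i : Nat) (cols : List (List Char)) : List (Nat × Nat) :=
  match cols with
  | [] => []
  | c :: cs =>
    if pvBlankCol c then pvRuns (i + 1) cs
    else (i, i + (cs.takeWhile (fun d => !pvBlankCol d)).length) ::
      pvRuns (i + (cs.takeWhile (fun d => !pvBlankCol d)).length + 1)
        (cs.dropWhile (fun d => !pvBlankCol d))
termination_by cols.length
decreasing_by
  · simp
  · simp only [List.length_cons]
    exact Nat.lt_succ_of_le (List.IsSuffix.length_le (List.dropWhile_suffix _))

-- A's fold over range(w) with getD lookups is pvGo
theorem pv_foldl_go (mask : List Bool) :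
    ∀ (n k : Nat) (st : List (Nat × Nat) × Bool × Nat), n = mask.length - k → k ≤ mask.length →
    (if ((List.range' k n).foldl (fun st c =>
          if !(mask.getD c false) && !st.2.1 then (st.1, true, c)
          else if mask.getD c false && st.2.1 then (st.1 ++ [(st.2.2, c - 1)], false, st.2.2)
          else st) st).2.1
     then ((List.range' k n).foldl (fun st c =>
          if !(mask.getD c false) && !st.2.1 then (st.1, true, c)
          else if mask.getD c false && st.2.1 then (st.1 ++ [(st.2.2, c - 1)], false, st.2.2)
          else st) st).1 ++ [(((List.range' k n).foldl (fun st c =>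
          if !(mask.getD c false) && !st.2.1 then (st.1, true, c)
          else if mask.getD c false && st.2.1 then (st.1 ++ [(st.2.2, c - 1)], false, st.2.2)
          else st) st).2.2, mask.length - 1)]
     else ((List.range' k n).foldl (fun st c =>
          if !(mask.getD c false) && !st.2.1 then (st.1, true, c)
          else if mask.getD c false && st.2.1 then (st.1 ++ [(st.2.2, c - 1)], false, st.2.2)
          else st) st).1)
    = pvGo k (mask.drop k) st := by
  intro n
  induction n with
  | zero =>
    intro k st hn hk
    have hkl : k = mask.length := by omega
    subst hkl
    simp [pvGo, List.range']
  | succ n ih =>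
    intro k st hn hk
    have hkl : k < mask.length := by omega
    have hdrop : mask.drop k = mask[k] :: mask.drop (k + 1) := List.drop_eq_getElem_cons hkl
    have hgetd : mask.getD k false = mask[k] := by
      simp [List.getD_eq_getElem?_getD, List.getElem?_eq_getElem hkl]
    rw [hdrop, List.range'_succ]
    simp only [List.foldl_cons, pvGo, hgetd]
    exact ih (k + 1) _ (by omega) (by omega)

-- the state machine produces exactly the runs of non-blank columns
theorem pv_go_runs : ∀ (n : Nat) (cols : List (List Char)), cols.length ≤ n →
    (∀ (i : Nat) (res : List (Nat × Nat)) (start : Nat),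
      pvGo i (cols.map pvBlankCol) (res, false, start) = res ++ pvRuns i cols)
    ∧ (∀ (i : Nat) (res : List (Nat × Nat)) (start : Nat),
      pvGo i (cols.map pvBlankCol) (res, true, start) =
        (res ++ [(start, i + (cols.takeWhile (fun d => !pvBlankCol d)).length - 1)]) ++
          pvRuns (i + (cols.takeWhile (fun d => !pvBlankCol d)).length)
            (cols.dropWhile (fun d => !pvBlankCol d))) := by
  intro n
  induction n with
  | zero =>
    intro cols hn
    have : cols = [] := List.eq_nil_of_length_eq_zero (by omega)
    subst this
    constructor <;> intro i res start <;> simp [pvGo, pvRuns]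
  | succ n ih =>
    intro cols hn
    match cols with
    | [] => constructor <;> intro i res start <;> simp [pvGo, pvRuns]
    | c :: cs =>
      have hcs := ih cs (by simp at hn ⊢; omega)
      constructor
      · intro i res start
        by_cases hb : pvBlankCol c = true
        · rw [List.map_cons, pvGo]
          simp only [hb]
          rw [(by rfl : (if !true && !false then (res, true, i)
              else if true && false then (res ++ [(start, i - 1)], false, start)
              else (res, false, start)) = ((res, false, start) : List (Nat × Nat) × Bool × Nat))]
          rw [hcs.1 (i + 1) res start]
          conv_rhs => rw [pvRuns]
          rw [if_pos hb]
        · have hbf : pvBlankCol c = false := by simpa using hb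
          rw [List.map_cons, pvGo]
          simp only [hbf]
          rw [(by rfl : (if !false && !false then (res, true, i)
              else if false && false then (res ++ [(start, i - 1)], false, start)
              else (res, false, start)) = ((res, true, i) : List (Nat × Nat) × Bool × Nat))]
          rw [hcs.2 (i + 1) res i]
          conv_rhs => rw [pvRuns]
          rw [if_neg hb, List.append_assoc, List.singleton_append]
          have e3 : i + 1 + (cs.takeWhile (fun d => !pvBlankCol d)).length - 1
              = i + (cs.takeWhile (fun d => !pvBlankCol d)).length := by omega
          have e4 : i + 1 + (cs.takeWhile (fun d => !pvBlankCol d)).length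
              = i + (cs.takeWhile (fun d => !pvBlankCol d)).length + 1 := by omega
          rw [e3, e4]
      · intro i res start
        by_cases hb : pvBlankCol c = true
        · rw [List.map_cons, pvGo]
          simp only [hb]
          rw [(by rfl : (if !true && !true then ((res : List (Nat × Nat)), true, i)
              else if true && true then (res ++ [(start, i - 1)], false, start)
              else (res, true, start)) = ((res ++ [(start, i - 1)], false, start) : List (Nat × Nat) × Bool × Nat))]
          rw [hcs.1 (i + 1) _ start]
          rw [List.takeWhile_cons_of_neg (by simp [hb]), List.dropWhile_cons_of_neg (by simp [hb])]
          conv_rhs => rw [pvRuns]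
          rw [if_pos hb]
          simp
        · have hbf : pvBlankCol c = false := by simpa using hb
          rw [List.map_cons, pvGo]
          simp only [hbf]
          rw [(by rfl : (if !false && !true then ((res : List (Nat × Nat)), true, i)
              else if false && true then (res ++ [(start, i - 1)], false, start)
              else (res, true, start)) = ((res, true, start) : List (Nat × Nat) × Bool × Nat))]
          rw [hcs.2 (i + 1) res start]
          rw [List.takeWhile_cons_of_pos (by simp [hbf]), List.dropWhile_cons_of_pos (by simp [hbf]),
            List.length_cons]
          have e2 : i + 1 + (cs.takeWhile (fun d => !pvBlankCol d)).length
              = i + ((cs.takeWhile (fun d => !pvBlankCol d)).length + 1) := by omega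
          rw [e2]

-- specification of pvRuns: bounds and blankness of members, coverage, gap chain
theorem pv_runs_spec : ∀ (n : Nat) (cols : List (List Char)), cols.length ≤ n → ∀ (i : Nat),
    (∀ ab ∈ pvRuns i cols, i ≤ ab.1 ∧ ab.1 ≤ ab.2 ∧ ab.2 < i + cols.length ∧
       (∀ c, ab.1 ≤ c → c ≤ ab.2 → pvBlankCol (cols.getD (c - i) []) = false) ∧
       (ab.1 = i ∨ pvBlankCol (cols.getD (ab.1 - 1 - i) []) = true) ∧
       (ab.2 + 1 = i + cols.length ∨ pvBlankCol (cols.getD (ab.2 + 1 - i) []) = true)) ∧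
    (∀ c, c < cols.length → pvBlankCol (cols.getD c []) = false →
       ∃ ab ∈ pvRuns i cols, ab.1 ≤ i + c ∧ i + c ≤ ab.2) ∧
    (pvRuns i cols).Pairwise (fun x y => x.2 + 1 < y.1) := by
  intro n
  induction n with
  | zero =>
    intro cols hn i
    have : cols = [] := List.eq_nil_of_length_eq_zero (by omega)
    subst this
    refine ⟨by simp [pvRuns], ?_, by simp [pvRuns]⟩
    intro c hc
    simp at hc
  | succ n ih =>
    intro cols hn i
    match cols with
    | [] =>
      refine ⟨by simp [pvRuns], ?_, by simp [pvRuns]⟩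
      intro c hc
      simp at hc
    | c :: cs =>
      simp only [List.length_cons] at hn
      by_cases hb : pvBlankCol c = true
      · have hruns : pvRuns i (c :: cs) = pvRuns (i + 1) cs := by
          rw [pvRuns, if_pos hb]
        obtain ⟨ihm, ihc, ihp⟩ := ih cs (by omega) (i + 1)
        rw [hruns]
        refine ⟨?_, ?_, ihp⟩
        · intro ab hab
          obtain ⟨h1, h2, h3, h4, h5, h6⟩ := ihm ab hab
          refine ⟨by omega, h2, by rw [List.length_cons]; omega, ?_, ?_, ?_⟩
          · intro cc hc1 hc2
            have := h4 cc hc1 hc2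
            have he : cc - i = (cc - (i + 1)) + 1 := by omega
            rwa [he, List.getD_cons_succ]
          · rcases h5 with h5 | h5
            · right
              have he : ab.1 - 1 - i = 0 := by omega
              rw [he]
              simpa using hb
            · right
              rcases Nat.lt_or_ge ab.1 (i + 2) with hlt | hge
              · rw [show ab.1 - 1 - i = 0 from by omega]
                simpa using hb
              · rw [show ab.1 - 1 - i = (ab.1 - 1 - (i + 1)) + 1 from by omega,
                  List.getD_cons_succ]
                exact h5
          · rcases h6 with h6 | h6
            · left; rw [List.length_cons]; omega
            · right
              have he : ab.2 + 1 - i = (ab.2 + 1 - (i + 1)) + 1 := by omega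
              rwa [he, List.getD_cons_succ]
        · intro cc hcc hnb
          match cc with
          | 0 => rw [List.getD_cons_zero] at hnb; rw [hnb] at hb; simp at hb
          | Nat.succ m =>
            rw [List.getD_cons_succ] at hnb
            obtain ⟨ab, hab, hc1, hc2⟩ := ihc m (by simpa using hcc) hnb
            exact ⟨ab, hab, by omega, by omega⟩
      · have hbf : pvBlankCol c = false := by simpa using hb
        set L := (cs.takeWhile (fun d => !pvBlankCol d)).length with hL
        have hdw : cs.dropWhile (fun d => !pvBlankCol d) = cs.drop L := by
          rw [hL, pv_dropWhile_eq_drop]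
        have hLle : L ≤ cs.length := by
          rw [hL]
          exact (List.takeWhile_prefix _).length_le
        have htwchars : ∀ k, k < L → pvBlankCol (cs.getD k []) = false := by
          intro k hk
          have hmem : cs.getD k [] ∈ cs.takeWhile (fun d => !pvBlankCol d) := by
            have htake : cs.takeWhile (fun d => !pvBlankCol d)
                = cs.take L := by rw [hL]; exact List.prefix_iff_eq_take.mp (List.takeWhile_prefix _)
            have : (cs.takeWhile (fun d => !pvBlankCol d))[k]? = some (cs.getD k []) := by
              rw [htake, List.getElem?_take, if_pos hk]
              rw [List.getD_eq_getElem?_getD, List.getElem?_eq_getElem (by omega)]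
              simp
            exact List.mem_of_getElem? this
          have := List.mem_takeWhile_imp hmem
          simpa using this
        have hLbd : L = cs.length ∨ pvBlankCol (cs.getD L []) = true := by
          rcases hdd : cs.drop L with _ | ⟨x, xs⟩
          · left
            rw [List.drop_eq_nil_iff] at hdd
            omega
          · right
            have h1 : cs.dropWhile (fun d => !pvBlankCol d) = x :: xs := by rw [hdw, hdd]
            have h2 := pv_dropWhile_head_false _ _ _ _ h1
            simp at h2
            have hx : cs.getD L [] = x := by
              have h0 : (cs.drop L).getD 0 [] = x := by rw [hdd]; rfl
              rw [pv_getD_drop] at h0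
              simpa using h0
            rw [hx]
            exact h2
        have hruns : pvRuns i (c :: cs) = (i, i + L) :: pvRuns (i + L + 1) (cs.drop L) := by
          rw [pvRuns, if_neg hb, hdw]
        obtain ⟨ihm, ihc, ihp⟩ := ih (cs.drop L) (by simp; omega) (i + L + 1)
        -- absolute getD translation for positions in the tail
        have htr : ∀ m, (cs.drop L).getD m [] = (c :: cs).getD (L + m + 1) [] := by
          intro m
          rw [pv_getD_drop]
          have : (L + m) + 1 = (L + m) + 1 := rfl
          rw [show L + m + 1 = (L + m) + 1 from rfl, List.getD_cons_succ]
        -- a run of the tail never starts at i + L + 1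
        have hrestlb : ∀ ab ∈ pvRuns (i + L + 1) (cs.drop L), i + L + 2 ≤ ab.1 := by
          intro ab hab
          obtain ⟨h1, h2, h3, h4, _, _⟩ := ihm ab hab
          rcases Nat.eq_or_lt_of_le h1 with he | he
          · exfalso
            have h0 : pvBlankCol ((cs.drop L).getD 0 []) = false := by
              have := h4 ab.1 le_rfl h2
              rwa [show ab.1 - (i + L + 1) = 0 from by omega] at this
            rcases hLbd with hx | hx
            · rw [List.drop_eq_nil_iff.mpr (by omega)] at h0
              simp [pvBlankCol] at h0
            · rw [pv_getD_drop, Nat.add_zero] at h0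
              rw [h0] at hx
              simp at hx
          · omega
        have hhead : ∀ cc, cc ≤ L → pvBlankCol ((c :: cs).getD cc []) = false := by
          intro cc hcc
          match cc with
          | 0 => simpa using hbf
          | Nat.succ m => rw [List.getD_cons_succ]; exact htwchars m (by omega)
        rw [hruns]
        refine ⟨?_, ?_, ?_⟩
        · intro ab hab
          rcases List.mem_cons.mp hab with rfl | hab
          · refine ⟨le_rfl, by simp, by simp; omega, ?_, Or.inl rfl, ?_⟩
            · intro cc h1 h2
              simp at h1 h2
              have := hhead (cc - i) (by omega)
              exact this
            · rcases hLbd with hx | hx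
              · left; simp; omega
              · right
                have he : i + L + 1 - i = L + 1 := by omega
                rw [show (i, i + L).2 + 1 - i = L + 1 from by simp; omega, List.getD_cons_succ]
                exact hx
          · obtain ⟨h1, h2, h3, h4, h5, h6⟩ := ihm ab hab
            have hlb := hrestlb ab hab
            refine ⟨by omega, h2, by simp at h3 ⊢; omega, ?_, ?_, ?_⟩
            · intro cc hc1 hc2
              have := h4 cc hc1 hc2
              rw [htr] at this
              rwa [show L + (cc - (i + L + 1)) + 1 = cc - i from by omega] at this
            · right
              rcases h5 with h5 | h5
              · omega
              · rw [htr] at h5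
                rwa [show L + (ab.1 - 1 - (i + L + 1)) + 1 = ab.1 - 1 - i from by omega] at h5
            · rcases h6 with h6 | h6
              · left; simp at h6 ⊢; omega
              · right
                rw [htr] at h6
                rwa [show L + (ab.2 + 1 - (i + L + 1)) + 1 = ab.2 + 1 - i from by omega] at h6
        · intro cc hcc hnb
          rcases Nat.lt_or_ge cc (L + 1) with h | h
          · exact ⟨(i, i + L), List.mem_cons_self, by simp, by simp; omega⟩
          · have he : cc = L + (cc - L - 1) + 1 := by omega
            rw [he, List.getD_cons_succ, ← pv_getD_drop (j := cc - L - 1)] at hnb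
            simp at hcc
            obtain ⟨ab, hab, hc1, hc2⟩ := ihc (cc - L - 1) (by simp; omega) hnb
            exact ⟨ab, List.mem_cons_of_mem _ hab, by omega, by omega⟩
        · refine List.pairwise_cons.mpr ⟨?_, ihp⟩
          intro ab hab
          have := hrestlb ab hab
          simp
          omega

-- largest token end of a list of tokens (the running right edge of B's merge)
def pvMaxEnd (P : List (Nat × Nat × Nat × List Char)) : Nat :=
  P.foldl (fun m t => max m t.2.1) 0

theorem pv_foldl_max_mono (P : List (Nat × Nat × Nat × List Char)) :
    ∀ (m0 : Nat), m0 ≤ P.foldl (fun m t => max m t.2.1) m0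
      ∧ ∀ t ∈ P, t.2.1 ≤ P.foldl (fun m t => max m t.2.1) m0 := by
  induction P with
  | nil => intro m0; simp
  | cons x P ih =>
    intro m0
    obtain ⟨h1, h2⟩ := ih (max m0 x.2.1)
    refine ⟨le_trans (Nat.le_max_left _ _) h1, ?_⟩
    intro t ht
    rcases List.mem_cons.mp ht with rfl | ht
    · exact le_trans (Nat.le_max_right _ _) h1
    · exact h2 t ht

theorem pv_le_maxEnd (P : List (Nat × Nat × Nat × List Char)) :
    ∀ t ∈ P, t.2.1 ≤ pvMaxEnd P := (pv_foldl_max_mono P 0).2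

theorem pv_foldl_max_le (P : List (Nat × Nat × Nat × List Char)) :
    ∀ (m0 b : Nat), m0 ≤ b → (∀ t ∈ P, t.2.1 ≤ b) →
      P.foldl (fun m t => max m t.2.1) m0 ≤ b := by
  induction P with
  | nil => intro m0 b hm _; simpa using hm
  | cons x Q ih =>
    intro m0 b hm h
    rw [List.foldl_cons]
    exact ih _ b (by have := h x List.mem_cons_self; omega)
      (fun t ht => h t (List.mem_cons_of_mem _ ht))

theorem pv_maxEnd_le (P : List (Nat × Nat × Nat × List Char)) (b : Nat)
    (h : ∀ t ∈ P, t.2.1 ≤ b) : pvMaxEnd P ≤ b :=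
  pv_foldl_max_le P 0 b (Nat.zero_le b) h

theorem pv_maxEnd_append_singleton (P : List (Nat × Nat × Nat × List Char))
    (t : Nat × Nat × Nat × List Char) : pvMaxEnd (P ++ [t]) = max (pvMaxEnd P) t.2.1 := by
  simp [pvMaxEnd]

-- in a start-sorted token list, everything after the ≤ b prefix starts beyond b
theorem pv_sorted_dropWhile_gt (b : Nat) :
    ∀ (T : List (Nat × Nat × Nat × List Char)), T.Pairwise (fun t u => t.1 ≤ u.1) →
    ∀ t ∈ T.dropWhile (fun t => decide (t.1 ≤ b)), b < t.1 := by
  intro T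
  induction T with
  | nil => intro _ t ht; simp at ht
  | cons x T ih =>
    intro hp t ht
    obtain ⟨hx, hT⟩ := List.pairwise_cons.mp hp
    by_cases hxb : x.1 ≤ b
    · rw [List.dropWhile_cons_of_pos (by simpa using hxb)] at ht
      exact ih hT t ht
    · rw [List.dropWhile_cons_of_neg (by simpa using hxb)] at ht
      rcases List.mem_cons.mp ht with rfl | ht
      · omega
      · have := hx t ht
        omega

-- within one run, B's merge only ever extends the current head interval
theorem pv_merge_run (a b : Nat) :
    ∀ (S P : List (Nat × Nat × Nat × List Char)) (acc : List (Nat × Nat)),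
      (P ++ S).Pairwise (fun t u => t.1 ≤ u.1) →
      (∀ t ∈ P ++ S, a ≤ t.1 ∧ t.1 ≤ t.2.1 ∧ t.2.1 ≤ b) →
      (∀ c, a ≤ c → c ≤ b → ∃ t ∈ P ++ S, t.1 ≤ c ∧ c ≤ t.2.1) →
      P ≠ [] →
      S.foldl pvMergeStep ((a, pvMaxEnd P) :: acc) = (a, pvMaxEnd (P ++ S)) :: acc := by
  intro S
  induction S with
  | nil =>
    intro P acc _ _ _ _
    simp
  | cons t S' ih =>
    intro P acc hs hin hcov hP
    have htmem : t ∈ P ++ t :: S' := List.mem_append_right _ List.mem_cons_self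
    have hstep : t.1 ≤ pvMaxEnd P + 1 := by
      by_contra hgt
      rw [not_le] at hgt
      obtain ⟨p0, hp0⟩ := List.exists_mem_of_ne_nil P hP
      have hp0in := hin p0 (List.mem_append_left _ hp0)
      have hp0e := pv_le_maxEnd P p0 hp0
      have htin := hin t htmem
      obtain ⟨u, hu, hu1, hu2⟩ := hcov (pvMaxEnd P + 1) (by omega) (by omega)
      rcases List.mem_append.mp hu with hu | hu
      · have := pv_le_maxEnd P u hu
        omega
      · rcases List.mem_cons.mp hu with rfl | hu
        · omega
        · have hrel : t.1 ≤ u.1 := by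
            have hsub : (t :: S').Pairwise (fun t u => t.1 ≤ u.1) :=
              List.Pairwise.sublist (List.sublist_append_right P (t :: S')) hs
            exact (List.pairwise_cons.mp hsub).1 u hu
          omega
    have hmerge : pvMergeStep ((a, pvMaxEnd P) :: acc) t
        = (a, pvMaxEnd (P ++ [t])) :: acc := by
      rw [pvMergeStep]
      rw [if_pos hstep, pv_maxEnd_append_singleton]
    rw [List.foldl_cons, hmerge]
    have hperm : (P ++ [t]) ++ S' = P ++ t :: S' := by
      rw [List.append_assoc, List.singleton_append]
    have := ih (P ++ [t]) acc (by rwa [hperm]) (by rwa [hperm]) (by rwa [hperm]) (by simp)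
    rwa [hperm] at this

-- B's sort-and-merge of the token intervals yields exactly the runs of non-blank columns
theorem pv_merge : ∀ (runsL : List (Nat × Nat))
    (T : List (Nat × Nat × Nat × List Char)) (acc : List (Nat × Nat)),
      T.Pairwise (fun t u => t.1 ≤ u.1) →
      (∀ t ∈ T, t.1 ≤ t.2.1 ∧ ∃ ab ∈ runsL, ab.1 ≤ t.1 ∧ t.2.1 ≤ ab.2) →
      (∀ ab ∈ runsL, ∀ c, ab.1 ≤ c → c ≤ ab.2 → ∃ t ∈ T, t.1 ≤ c ∧ c ≤ t.2.1) →
      runsL.Pairwise (fun x y => x.2 + 1 < y.1) →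
      (∀ ab ∈ runsL, ab.1 ≤ ab.2) →
      (∀ hd rest, acc = hd :: rest → ∀ ab ∈ runsL, hd.2 + 1 < ab.1) →
      T.foldl pvMergeStep acc = runsL.reverse ++ acc := by
  intro runsL
  induction runsL with
  | nil =>
    intro T acc _ htok _ _ _ _
    have : T = [] := by
      rw [List.eq_nil_iff_forall_not_mem]
      intro t ht
      obtain ⟨_, ab, hab, _⟩ := htok t ht
      simp at hab
    rw [this]
    simp
  | cons ab0 rest ih =>
    intro T acc hs htok hcov hchain hord hacc
    obtain ⟨a, b⟩ := ab0
    obtain ⟨hchead, hctail⟩ := List.pairwise_cons.mp hchain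
    have hab : a ≤ b := hord (a, b) List.mem_cons_self
    set T1 := T.takeWhile (fun t => decide (t.1 ≤ b)) with hT1
    set T2 := T.dropWhile (fun t => decide (t.1 ≤ b)) with hT2
    have hsplit : T = T1 ++ T2 := (List.takeWhile_append_dropWhile).symm
    have hT2gt : ∀ t ∈ T2, b < t.1 := pv_sorted_dropWhile_gt b T hs
    have hT1le : ∀ t ∈ T1, t.1 ≤ b := by
      intro t ht
      have := List.mem_takeWhile_imp (hT1 ▸ ht)
      simpa using this
    have hT1in : ∀ t ∈ T1, a ≤ t.1 ∧ t.1 ≤ t.2.1 ∧ t.2.1 ≤ b := by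
      intro t ht
      have htT : t ∈ T := hsplit ▸ List.mem_append_left _ ht
      obtain ⟨hse, ab', hab', h1, h2⟩ := htok t htT
      rcases List.mem_cons.mp hab' with rfl | hab'
      · exact ⟨h1, hse, h2⟩
      · exfalso
        have := hchead ab' hab'
        have := hT1le t ht
        omega
    have hcov1 : ∀ c, a ≤ c → c ≤ b → ∃ t ∈ T1, t.1 ≤ c ∧ c ≤ t.2.1 := by
      intro c h1 h2
      obtain ⟨t, ht, hc1, hc2⟩ := hcov (a, b) List.mem_cons_self c h1 h2
      rw [hsplit] at ht
      rcases List.mem_append.mp ht with ht | ht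
      · exact ⟨t, ht, hc1, hc2⟩
      · exfalso
        have := hT2gt t ht
        omega
    obtain ⟨ta, hta, hta1, hta2⟩ := hcov1 a le_rfl hab
    have hT1ne : T1 ≠ [] := List.ne_nil_of_mem hta
    rcases hT1c : T1 with _ | ⟨t1, T1t⟩
    · exact absurd hT1c hT1ne
    have hT1p : T1.Pairwise (fun t u => t.1 ≤ u.1) := by
      rw [hT1]
      exact List.Pairwise.sublist (List.takeWhile_prefix _).sublist hs
    have ht1a : t1.1 = a := by
      have h1 : a ≤ t1.1 := (hT1in t1 (hT1c ▸ List.mem_cons_self)).1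
      have h2 : t1.1 ≤ ta.1 := by
        rw [hT1c] at hta hT1p
        rcases List.mem_cons.mp hta with rfl | hta
        · exact le_rfl
        · exact (List.pairwise_cons.mp hT1p).1 ta hta
      omega
    have hstep1 : pvMergeStep acc t1 = (a, pvMaxEnd [t1]) :: acc := by
      have hme : pvMaxEnd [t1] = t1.2.1 := by simp [pvMaxEnd]
      rcases acc with _ | ⟨hd, rest'⟩
      · rw [pvMergeStep, hme, ht1a]
      · rw [pvMergeStep]
        obtain ⟨s0, e0⟩ := hd
        rw [if_neg (by
          have := hacc (s0, e0) rest' rfl (a, b) List.mem_cons_self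
          have ha1 : a ≤ t1.1 := le_of_eq ht1a.symm
          simp at this ⊢
          omega), hme, ht1a]
    have hmaxb : pvMaxEnd T1 = b := by
      refine le_antisymm (pv_maxEnd_le T1 b (fun t ht => (hT1in t ht).2.2)) ?_
      obtain ⟨u, hu, hu1, hu2⟩ := hcov1 b hab le_rfl
      exact le_trans hu2 (pv_le_maxEnd T1 u hu)
    have hrun : T1.foldl pvMergeStep acc = (a, b) :: acc := by
      rw [hT1c, List.foldl_cons, hstep1]
      have := pv_merge_run a b T1t [t1] acc
        (by rw [List.singleton_append, ← hT1c]; exact hT1p)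
        (by rw [List.singleton_append, ← hT1c]; exact hT1in)
        (by rw [List.singleton_append, ← hT1c]; exact hcov1)
        (by simp)
      rw [List.singleton_append, ← hT1c, hmaxb] at this
      exact this
    rw [hsplit, List.foldl_append, hrun]
    have hT2p : T2.Pairwise (fun t u => t.1 ≤ u.1) := by
      rw [hT2]
      exact List.Pairwise.sublist (List.dropWhile_suffix _).sublist hs
    have := ih T2 ((a, b) :: acc) hT2p
      (by
        intro t ht
        have htT : t ∈ T := hsplit ▸ List.mem_append_right _ ht
        obtain ⟨hse, ab', hab', h1, h2⟩ := htok t htT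
        refine ⟨hse, ab', ?_, h1, h2⟩
        rcases List.mem_cons.mp hab' with rfl | hab'
        · exfalso
          have := hT2gt t ht
          omega
        · exact hab')
      (by
        intro ab' hab' c h1 h2
        obtain ⟨t, ht, hc1, hc2⟩ := hcov ab' (List.mem_cons_of_mem _ hab') c h1 h2
        rw [hsplit] at ht
        rcases List.mem_append.mp ht with ht | ht
        · exfalso
          have hgt := hchead ab' hab'
          have := (hT1in t ht).2.2
          omega
        · exact ⟨t, ht, hc1, hc2⟩)
      hctail
      (fun ab' hab' => hord ab' (List.mem_cons_of_mem _ hab'))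
      (by
        intro hd rest' he ab' hab'
        cases he
        exact hchead ab' hab')
    rw [this, List.reverse_cons, List.append_assoc, List.singleton_append]

theorem pv_dropWhile_congr {α : Type} (p q : α → Bool) :
    ∀ (l : List α), (∀ x ∈ l, p x = q x) → l.dropWhile p = l.dropWhile q := by
  intro l
  induction l with
  | nil => intro _; rfl
  | cons a l ih =>
    intro h
    have ha := h a List.mem_cons_self
    by_cases hp : p a
    · rw [List.dropWhile_cons_of_pos hp, List.dropWhile_cons_of_pos (ha ▸ hp),
        ih (fun x hx => h x (List.mem_cons_of_mem _ hx))]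
    · rw [List.dropWhile_cons_of_neg hp, List.dropWhile_cons_of_neg (by rw [← ha]; exact hp)]

theorem pv_char_eq_iff_toNat (c d : Char) : (c = d) ↔ (c.toNat = d.toNat) := by
  constructor
  · rintro rfl; rfl
  · intro h
    exact Char.ext (UInt32.toNat_inj.mp h)

-- on the stated input domain, str.strip whitespace and int() whitespace coincide
theorem pv_isspace_eq (c : Char) (h : pvDomChar c = true) :
    PySem.Chars.isspace c = PySem.Int.isIntSpace c := by
  simp only [pvDomChar, Bool.or_eq_true, Bool.and_eq_true, decide_eq_true_eq, beq_iff_eq] at h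
  rw [Bool.eq_iff_iff]
  simp only [PySem.Chars.isspace, PySem.Int.isIntSpace, Bool.or_eq_true, Bool.and_eq_true,
    decide_eq_true_eq, pv_char_eq_iff_toNat,
    show ' '.toNat = 32 from rfl, show '\t'.toNat = 9 from rfl, show '\n'.toNat = 10 from rfl,
    show '\x0d'.toNat = 13 from rfl, show '\x0b'.toNat = 11 from rfl, show '\x0c'.toNat = 12 from rfl]
  omega

theorem pv_mem_dropWhile_of_not {α : Type} (p : α → Bool) :
    ∀ (l : List α) (x : α), x ∈ l → p x = false → x ∈ l.dropWhile p := by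
  intro l
  induction l with
  | nil => intro x hx; simp at hx
  | cons a l ih =>
    intro x hx hp
    by_cases hpa : p a
    · rw [List.dropWhile_cons_of_pos hpa]
      rcases List.mem_cons.mp hx with rfl | hx
      · rw [hpa] at hp; simp at hp
      · exact ih x hx hp
    · rw [List.dropWhile_cons_of_neg hpa]
      exact hx

theorem pv_dropWhile_eq_nil_of_all {α : Type} (p : α → Bool) :
    ∀ (l : List α), (∀ x ∈ l, p x = true) → l.dropWhile p = [] := by
  intro l
  induction l with
  | nil => intro _; rfl
  | cons a l ih =>
    intro h
    rw [List.dropWhile_cons_of_pos (h a List.mem_cons_self)]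
    exact ih (fun x hx => h x (List.mem_cons_of_mem _ hx))

theorem pv_strip_all_space (l : List Char) (h : ∀ c ∈ l, PySem.Chars.isspace c = true) :
    PySem.Chars.strip l = [] := by
  simp only [PySem.Chars.strip, PySem.Chars.lstrip, PySem.Chars.rstrip]
  rw [pv_dropWhile_eq_nil_of_all _ l h]
  rfl

theorem pv_strip_ne_nil (l : List Char) (x : Char) (hx : x ∈ l)
    (h : PySem.Chars.isspace x = false) : PySem.Chars.strip l ≠ [] := by
  simp only [PySem.Chars.strip, PySem.Chars.lstrip, PySem.Chars.rstrip]
  intro hc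
  rw [List.reverse_eq_nil_iff] at hc
  have h1 : x ∈ List.dropWhile PySem.Chars.isspace l := pv_mem_dropWhile_of_not _ l x hx h
  have h2 : x ∈ (List.dropWhile PySem.Chars.isspace l).reverse := List.mem_reverse.mpr h1
  have h3 := pv_mem_dropWhile_of_not _ _ x h2 h
  rw [hc] at h3
  simp at h3

-- stripping ignores an all-whitespace prefix and suffix
theorem pv_rstrip_append_space (l V : List Char) (hV : ∀ c ∈ V, PySem.Chars.isspace c = true) :
    PySem.Chars.rstrip (l ++ V) = PySem.Chars.rstrip l := by
  simp only [PySem.Chars.rstrip]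
  rw [List.reverse_append, List.dropWhile_append,
    pv_dropWhile_eq_nil_of_all _ V.reverse (fun c hc => hV c (List.mem_reverse.mp hc))]
  simp

theorem pv_strip_prefix_space (U l : List Char) (hU : ∀ c ∈ U, PySem.Chars.isspace c = true) :
    PySem.Chars.strip (U ++ l) = PySem.Chars.strip l := by
  simp only [PySem.Chars.strip, PySem.Chars.lstrip]
  rw [List.dropWhile_append, pv_dropWhile_eq_nil_of_all _ U hU]
  simp

theorem pv_strip_suffix_space (l V : List Char) (hV : ∀ c ∈ V, PySem.Chars.isspace c = true) :
    PySem.Chars.strip (l ++ V) = PySem.Chars.strip l := by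
  by_cases hls : List.dropWhile PySem.Chars.isspace l = []
  · simp only [PySem.Chars.strip, PySem.Chars.lstrip]
    rw [List.dropWhile_append, hls]
    simp only [List.isEmpty_nil, if_true]
    rw [pv_dropWhile_eq_nil_of_all _ V hV]
  · simp only [PySem.Chars.strip, PySem.Chars.lstrip]
    rw [List.dropWhile_append, if_neg (by simpa using hls)]
    exact pv_rstrip_append_space _ V hV

theorem pv_strip_sandwich (U m V : List Char)
    (hU : ∀ c ∈ U, PySem.Chars.isspace c = true)
    (hV : ∀ c ∈ V, PySem.Chars.isspace c = true) :
    PySem.Chars.strip (U ++ m ++ V) = PySem.Chars.strip m := by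
  rw [List.append_assoc, pv_strip_prefix_space U _ hU, pv_strip_suffix_space m V hV]

-- int()'s own two-sided whitespace strip
def pvStripInt (l : List Char) : List Char :=
  (List.dropWhile PySem.Int.isIntSpace (List.dropWhile PySem.Int.isIntSpace l).reverse).reverse

theorem pv_ofChars_congr (a b : List Char) (h : pvStripInt a = pvStripInt b) :
    PySem.Int.ofChars? a = PySem.Int.ofChars? b := by
  simp only [pvStripInt] at h
  simp only [PySem.Int.ofChars?]
  rw [h]

theorem pv_dropWhile_idem {α : Type} (p : α → Bool) (l : List α) :
    (l.dropWhile p).dropWhile p = l.dropWhile p := by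
  rcases h : l.dropWhile p with _ | ⟨x, xs⟩
  · rfl
  · rw [List.dropWhile_cons_of_neg (by rw [pv_dropWhile_head_false p l xs x h]; simp)]

theorem pv_stripInt_idem (l : List Char) : pvStripInt (pvStripInt l) = pvStripInt l := by
  set p := PySem.Int.isIntSpace with hp
  set A := List.dropWhile p l with hA
  set B := List.dropWhile p A.reverse with hB
  have hBrev : List.dropWhile p B.reverse = B.reverse := by
    rcases hAc : A with _ | ⟨a, as⟩
    · rw [hB, hAc]
      simp
    · have hpa : p a = false := pv_dropWhile_head_false p l as a (by rw [← hA]; exact hAc)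
      have hBtail : ∃ C, B = C ++ [a] := by
        rw [hB, hAc, List.reverse_cons, List.dropWhile_append]
        by_cases he : (List.dropWhile p as.reverse).isEmpty
        · rw [if_pos he, List.dropWhile_cons_of_neg (by rw [hpa]; simp)]
          exact ⟨[], by simp⟩
        · rw [if_neg he]
          exact ⟨_, rfl⟩
      obtain ⟨C, hC⟩ := hBtail
      rw [hC, List.reverse_append]
      rw [List.reverse_singleton, List.singleton_append,
        List.dropWhile_cons_of_neg (by rw [hpa]; simp)]
  show (List.dropWhile p (List.dropWhile p B.reverse).reverse).reverse = B.reverse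
  rw [hBrev, List.reverse_reverse, pv_dropWhile_idem]

-- int() of a string equals int() of its stripped form (on the input domain)
theorem pv_ofChars_strip (l : List Char) (hdom : ∀ c ∈ l, pvDomChar c = true) :
    PySem.Int.ofChars? (PySem.Chars.strip l) = PySem.Int.ofChars? l := by
  apply pv_ofChars_congr
  have hstrip : PySem.Chars.strip l = pvStripInt l := by
    simp only [PySem.Chars.strip, PySem.Chars.lstrip, PySem.Chars.rstrip, pvStripInt]
    rw [pv_dropWhile_congr PySem.Chars.isspace PySem.Int.isIntSpace l
      (fun x hx => pv_isspace_eq x (hdom x hx))]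
    congr 1
    apply pv_dropWhile_congr
    intro x hx
    apply pv_isspace_eq
    apply hdom
    have := (List.dropWhile_sublist (l := l) (p := PySem.Int.isIntSpace)).mem (List.mem_reverse.mp hx)
    exact this
  rw [hstrip, pv_stripInt_idem]

-- wrappers of the scan spec at offset 0
theorem pv_scan_mem (row : List Char) (r : Nat) (t : Nat × Nat × Nat × List Char)
    (ht : t ∈ pvScan r 0 row) :
    t.2.2.1 = r ∧ t.1 ≤ t.2.1 ∧ t.2.1 < row.length ∧
    t.2.2.2 = (row.drop t.1).take (t.2.1 + 1 - t.1) ∧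
    (∀ c, t.1 ≤ c → c ≤ t.2.1 → ¬ row.getD c ' ' = ' ') ∧
    (t.1 = 0 ∨ row.getD (t.1 - 1) ' ' = ' ') := by
  have := (pv_scan_spec row r row.length 0 (by omega)).1 t (by rwa [List.drop_zero])
  exact ⟨this.1, this.2.2.1, this.2.2.2.1, this.2.2.2.2.1, this.2.2.2.2.2.1, this.2.2.2.2.2.2⟩

theorem pv_scan_cov (row : List Char) (r p : Nat) (hp : p < row.length)
    (hns : ¬ row.getD p ' ' = ' ') : ∃ t ∈ pvScan r 0 row, t.1 ≤ p ∧ p ≤ t.2.1 := by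
  have := (pv_scan_spec row r row.length 0 (by omega)).2.1 p (Nat.zero_le p) hp hns
  rwa [List.drop_zero] at this

theorem pv_scan_pairwise (row : List Char) (r : Nat) :
    (pvScan r 0 row).Pairwise (fun t u => t.2.1 + 1 < u.1) := by
  have := (pv_scan_spec row r row.length 0 (by omega)).2.2
  rwa [List.drop_zero] at this

theorem pv_scan_nodup (row : List Char) (r : Nat) : (pvScan r 0 row).Nodup := by
  rw [List.nodup_iff_pairwise_ne]
  refine List.Pairwise.imp_of_mem ?_ (pv_scan_pairwise row r)
  intro t u htm _ hrel he
  have := (pv_scan_mem row r t htm).2.1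
  subst he
  omega

theorem pv_mem_pvToks : ∀ (L : List (List Char)) (r0 : Nat) (t : Nat × Nat × Nat × List Char),
    t ∈ pvToks r0 L ↔ ∃ k, k < L.length ∧ t ∈ pvScan (r0 + k) 0 (L.getD k []) := by
  intro L
  induction L with
  | nil => intro r0 t; simp [pvToks]
  | cons row rest ih =>
    intro r0 t
    rw [pvToks, List.mem_append, ih (r0 + 1) t]
    constructor
    · rintro (h | ⟨k, hk, h⟩)
      · exact ⟨0, by simp, by simpa using h⟩
      · exact ⟨k + 1, by simp; omega, by rw [List.getD_cons_succ]; rwa [show r0 + (k + 1) = r0 + 1 + k from by omega]⟩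
    · rintro ⟨k, hk, h⟩
      match k with
      | 0 => left; simpa using h
      | Nat.succ m =>
        right
        refine ⟨m, by simp at hk; omega, ?_⟩
        rw [List.getD_cons_succ] at h
        rwa [show r0 + 1 + m = r0 + (m + 1) from by omega]

theorem pv_flatMap_congr {α β : Type} (l : List α) (f g : α → List β)
    (h : ∀ x ∈ l, f x = g x) : l.flatMap f = l.flatMap g := by
  induction l with
  | nil => rfl
  | cons a l ih =>
    simp only [List.flatMap_cons]
    rw [h a List.mem_cons_self, ih (fun x hx => h x (List.mem_cons_of_mem _ hx))]

theorem pv_filterMap_eq_flatMap_toList {α β : Type} (f : α → Option β) :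
    ∀ (l : List α), l.filterMap f = l.flatMap (fun a => (f a).toList) := by
  intro l
  induction l with
  | nil => rfl
  | cons a l ih =>
    rw [List.flatMap_cons, ← ih]
    rcases hf : f a with _ | y
    · rw [List.filterMap_cons_none hf]
      simp
    · rw [List.filterMap_cons_some hf]
      simp

theorem pv_toks_filterMap (f : Nat × Nat × Nat × List Char → Option Int) :
    ∀ (L : List (List Char)) (r0 : Nat),
    (pvToks r0 L).filterMap f
      = (List.range' r0 L.length).flatMap (fun r => (pvScan r 0 (L.getD (r - r0) [])).filterMap f) := by
  intro L
  induction L with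
  | nil => intro r0; simp [pvToks]
  | cons row rest ih =>
    intro r0
    rw [pvToks, List.filterMap_append, List.length_cons, List.range'_succ, List.flatMap_cons,
      Nat.sub_self, List.getD_cons_zero, ih (r0 + 1)]
    congr 1
    apply pv_flatMap_congr
    intro r hr
    rw [List.mem_range'_1] at hr
    rw [show r - r0 = (r - (r0 + 1)) + 1 from by omega, List.getD_cons_succ]

theorem pv_filterMap_singleton {α β : Type} (f : α → Option β) (x : α) (y : β) :
    ∀ (l : List α), l.Nodup → x ∈ l → f x = some y →
    (∀ u ∈ l, f u ≠ none → u = x) → l.filterMap f = [y] := by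
  intro l
  induction l with
  | nil => intro _ hx; simp at hx
  | cons a l ih =>
    intro hnd hx hfx huni
    rcases List.mem_cons.mp hx with rfl | hx
    · rw [List.filterMap_cons_some hfx]
      have : l.filterMap f = [] := by
        rw [List.filterMap_eq_nil_iff]
        intro u hu
        by_contra hne
        have := huni u (List.mem_cons_of_mem _ hu) hne
        subst this
        exact (List.nodup_cons.mp hnd).1 hu
      rw [this]
    · have hfa : f a = none := by
        by_contra hne
        have := huni a List.mem_cons_self hne
        subst this
        exact (List.nodup_cons.mp hnd).1 hx
      rw [List.filterMap_cons_none hfa]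
      exact ih (List.nodup_cons.mp hnd).2 hx hfx
        (fun u hu hne => huni u (List.mem_cons_of_mem _ hu) hne)

-- slicing the clipped row is slicing the row (b < w)
theorem pv_slice_clip (X : List Char) (w a b : Nat) (hbw : b < w) :
    (X.drop a).take (b + 1 - a) = ((X.take w).drop a).take (b + 1 - a) := by
  rw [List.drop_take, List.take_take, Nat.min_def, if_pos (by omega)]

-- a slice splits around an inner token
theorem pv_slice_decomp (row : List Char) (a s e b : Nat) (h1 : a ≤ s) (h2 : s ≤ e) (h3 : e ≤ b) :
    (row.drop a).take (b + 1 - a)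
      = (row.drop a).take (s - a) ++ ((row.drop s).take (e + 1 - s) ++ (row.drop (e + 1)).take (b - e)) := by
  rw [show b + 1 - a = (s - a) + ((e + 1 - s) + (b - e)) from by omega, List.take_add, List.take_add,
    List.drop_drop, List.drop_drop]
  rw [show a + (s - a) = s from by omega, show s + (e + 1 - s) = e + 1 from by omega]

-- the characters of a slice, positionally
theorem pv_slice_getD (row : List Char) (lo n j : Nat) (d : Char) (hj : j < n) :
    ((row.drop lo).take n).getD j d = row.getD (lo + j) d := by
  rw [pv_getD_take _ _ _ _ hj, pv_getD_drop]

theorem pv_mem_slice_iff (row : List Char) (lo n : Nat) (hn : lo + n ≤ row.length) (x : Char) :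
    x ∈ (row.drop lo).take n ↔ ∃ j, j < n ∧ row.getD (lo + j) ' ' = x := by
  constructor
  · intro hx
    obtain ⟨j, hj, he⟩ := List.mem_iff_getElem.mp hx
    have hjn : j < n := by
      have := hj
      simp [List.length_take, List.length_drop] at this
      omega
    refine ⟨j, hjn, ?_⟩
    rw [← pv_slice_getD row lo n j ' ' hjn, List.getD_eq_getElem?_getD,
      List.getElem?_eq_getElem hj, he]
    rfl
  · rintro ⟨j, hj, he⟩
    rw [← he, ← pv_slice_getD row lo n j ' ' hj, List.getD_eq_getElem?_getD]
    have hlt : j < ((row.drop lo).take n).length := by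
      simp [List.length_take, List.length_drop]
      omega
    rw [List.getElem?_eq_getElem hlt]
    exact List.getElem_mem hlt

-- the columns of the clipped grid
def pvColsOf (R : List (List Char)) (w : Nat) : List (List Char) :=
  (List.range w).map (fun c => R.map (fun row => row.getD c ' '))

theorem pv_colsOf_getD (R : List (List Char)) (w c : Nat) (hc : c < w) :
    (pvColsOf R w).getD c [] = R.map (fun row => row.getD c ' ') := by
  rw [pvColsOf, List.getD_eq_getElem?_getD, List.getElem?_map, List.getElem?_range hc]
  rfl

theorem pv_blank_true_iff (R : List (List Char)) (w c : Nat) (hc : c < w) :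
    pvBlankCol ((pvColsOf R w).getD c []) = true ↔ ∀ row ∈ R, row.getD c ' ' = ' ' := by
  rw [pv_colsOf_getD R w c hc, pvBlankCol, List.all_map, List.all_eq_true]
  simp

theorem pv_blank_false_iff (R : List (List Char)) (w c : Nat) (hc : c < w) :
    pvBlankCol ((pvColsOf R w).getD c []) = false ↔ ∃ row ∈ R, ¬ row.getD c ' ' = ' ' := by
  rw [← Bool.not_eq_true, pv_blank_true_iff R w c hc]
  simp

-- a token interval is contained in the run its start touches
theorem pv_token_in_run (R : List (List Char)) (w : Nat)
    (hw : ∀ row ∈ R, row.length = w)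
    (a b : Nat) (_hab : a ≤ b) (hbw : b < w)
    (hleft : a = 0 ∨ pvBlankCol ((pvColsOf R w).getD (a - 1) []) = true)
    (hright : b + 1 = w ∨ pvBlankCol ((pvColsOf R w).getD (b + 1) []) = true)
    (row : List Char) (hrow : row ∈ R) (r : Nat)
    (t : Nat × Nat × Nat × List Char) (ht : t ∈ pvScan r 0 row)
    (j : Nat) (h1 : t.1 ≤ j) (h2 : j ≤ t.2.1) (h3 : a ≤ j) (h4 : j ≤ b) :
    a ≤ t.1 ∧ t.2.1 ≤ b := by
  obtain ⟨_, hse, hend, _, hns, _⟩ := pv_scan_mem row r t ht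
  constructor
  · by_contra hlt
    rw [not_le] at hlt
    have ha1 : 1 ≤ a := by omega
    rcases hleft with h | h
    · omega
    · have := (pv_blank_true_iff R w (a - 1) (by omega)).mp h row hrow
      exact hns (a - 1) (by omega) (by omega) this
  · by_contra hgt
    rw [not_le] at hgt
    by_cases hbe : b + 1 = w
    · have h2 := hw row hrow
      omega
    · have hblank : pvBlankCol ((pvColsOf R w).getD (b + 1) []) = true := by
        rcases hright with h | h
        · exact absurd h hbe
        · exact h
      have := (pv_blank_true_iff R w (b + 1) (by omega)).mp hblank row hrow
      exact hns (b + 1) (by omega) (by omega) this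

-- a run of pvRuns over the clipped columns is a block in the sense of Pre_'s pvIsBlock
theorem pv_run_isBlock (g : List String) :
    ∀ (a b : Nat),
    (let w := (g.headD "").toList.length
     let R := g.map (fun s => s.toList.take w)
     a ≤ b ∧ b < w ∧
     (∀ c, a ≤ c → c ≤ b → pvBlankCol ((pvColsOf R w).getD c []) = false) ∧
     (a = 0 ∨ pvBlankCol ((pvColsOf R w).getD (a - 1) []) = true) ∧
     (b + 1 = w ∨ pvBlankCol ((pvColsOf R w).getD (b + 1) []) = true)) →
    pvIsBlock g a b = true := by
  intro a b h
  obtain ⟨hab, hbw, hin, hleft, hright⟩ := h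
  have hcb : ∀ c, c < (g.headD "").toList.length →
      pvColBlank g c = pvBlankCol ((pvColsOf (g.map (fun s => s.toList.take (g.headD "").toList.length))
        (g.headD "").toList.length).getD c []) := by
    intro c hc
    rw [pv_colsOf_getD _ _ _ hc, pvColBlank, pvBlankCol, List.all_map, List.all_map]
    refine List.all_congr rfl ?_
    intro s
    simp only [Function.comp]
    rw [pv_getD_take _ _ _ _ hc]
  rw [pvIsBlock]
  simp only [Bool.and_eq_true, decide_eq_true_eq]
  refine ⟨⟨⟨⟨hab, hbw⟩, ?_⟩, ?_⟩, ?_⟩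
  · rw [List.all_eq_true]
    intro c hcr
    rw [List.mem_range] at hcr
    by_cases hcab : a ≤ c ∧ c ≤ b
    · have := hin c hcab.1 hcab.2
      rw [← hcb c hcr] at this
      simp [this, hcab]
    · rw [Bool.or_eq_true]
      left
      simp only [Bool.not_eq_eq_eq_not, Bool.not_true, Bool.and_eq_false_iff]
      rcases Decidable.not_and_iff_not_or_not.mp hcab with h | h
      · left; simpa using h
      · right; simpa using h
  · rcases hleft with h | h
    · simp [h]
    · rw [Bool.or_eq_true]
      right
      rw [hcb (a - 1) (by omega)]
      exact h
  · by_cases hbe : b + 1 = (g.headD "").toList.length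
    · rw [Bool.or_eq_true]
      left
      simp only [decide_eq_true_eq]
      omega
    · have hblank : pvBlankCol ((pvColsOf (g.map (fun s => s.toList.take (g.headD "").toList.length))
          (g.headD "").toList.length).getD (b + 1) []) = true := by
        rcases hright with h | h
        · exact absurd h hbe
        · exact h
      rw [Bool.or_eq_true]
      right
      rw [hcb (b + 1) (by omega)]
      exact hblank

-- what pvNoSplit forbids, extracted pointwise
theorem pv_nosplit_extract (g : List String) (hns : pvNoSplit g = true)
    (a b : Nat) (hblk : pvIsBlock g a b = true)
    (ha : a < (g.headD "").toList.length) (hb : b < (g.headD "").toList.length)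
    (s : String) (hs : s ∈ g.dropLast)
    (m p q : Nat) (hm1 : a ≤ m) (hm2 : m ≤ b)
    (hmc : s.toList.getD m ' ' = ' ')
    (hp1 : a ≤ p) (hp2 : p < m) (hpc : PySem.Chars.isspace (s.toList.getD p ' ') = false)
    (hq1 : m < q) (hq2 : q ≤ b) (hqc : PySem.Chars.isspace (s.toList.getD q ' ') = false) :
    False := by
  rw [pvNoSplit] at hns
  rw [List.all_eq_true] at hns
  have h1 := hns a (List.mem_range.mpr ha)
  rw [List.all_eq_true] at h1
  have h2 := h1 b (List.mem_range.mpr hb)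
  rw [Bool.or_eq_true] at h2
  rcases h2 with h2 | h2
  · rw [hblk] at h2
    simp at h2
  · rw [List.all_eq_true] at h2
    have h3 := h2 s hs
    rw [List.all_eq_true] at h3
    have h4 := h3 m (List.mem_range.mpr (by omega))
    rw [Bool.not_eq_eq_eq_not, Bool.not_true, Bool.and_eq_false_iff, Bool.and_eq_false_iff,
      Bool.and_eq_false_iff, Bool.and_eq_false_iff] at h4
    rcases h4 with ((((h4 | h4) | h4) | h4) | h4)
    · simp at h4
      omega
    · simp at h4
      omega
    · rw [beq_eq_false_iff_ne] at h4
      exact h4 hmc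
    · rw [List.any_eq_false] at h4
      have h5 := h4 p (List.mem_range.mpr hp2)
      simp at h5
      exact absurd (h5 hp1) (by rw [← List.getD_eq_getElem?_getD, hpc]; simp)
    · rw [List.any_eq_false] at h4
      have h5 := h4 q (List.mem_range.mpr (by omega))
      simp at h5
      exact absurd (h5 hq1) (by rw [← List.getD_eq_getElem?_getD, hqc]; simp)

theorem pv_token_char (row : List Char) (r : Nat) (t : Nat × Nat × Nat × List Char)
    (ht : t ∈ pvScan r 0 row) (j : Nat) (h1 : t.1 ≤ j) (h2 : j ≤ t.2.1) :
    row.getD j ' ' ∈ t.2.2.2 := by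
  obtain ⟨_, hse, hend, htext, _, _⟩ := pv_scan_mem row r t ht
  rw [htext, pv_mem_slice_iff row t.1 (t.2.1 + 1 - t.1) (by omega)]
  exact ⟨j - t.1, by omega, by rw [Nat.add_sub_cancel' h1]⟩

theorem pv_token_char_pos (row : List Char) (r : Nat) (t : Nat × Nat × Nat × List Char)
    (ht : t ∈ pvScan r 0 row) (x : Char) (hx : x ∈ t.2.2.2) :
    ∃ j, t.1 ≤ j ∧ j ≤ t.2.1 ∧ row.getD j ' ' = x := by
  obtain ⟨_, hse, hend, htext, _, _⟩ := pv_scan_mem row r t ht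
  rw [htext, pv_mem_slice_iff row t.1 (t.2.1 + 1 - t.1) (by omega)] at hx
  obtain ⟨j, hj, he⟩ := hx
  exact ⟨t.1 + j, by omega, by omega, he⟩

theorem pv_real_char (l : List Char) (h : (PySem.Chars.strip l).isEmpty = false) :
    ∃ x ∈ l, PySem.Chars.isspace x = false := by
  by_contra hc
  rw [not_exists] at hc
  have hall : ∀ x ∈ l, PySem.Chars.isspace x = true := by
    intro x hx
    by_contra hxx
    exact hc x ⟨hx, by simpa using hxx⟩
  rw [pv_strip_all_space l hall] at h
  simp at h

-- at most one token per row holds non-whitespace text inside one block (from pvNoSplit)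
theorem pv_unique_real (g : List String)
    (hlen : ∀ s ∈ g, (g.headD "").toList.length ≤ s.toList.length)
    (hns : pvNoSplit g = true)
    (a b : Nat) (hblk : pvIsBlock g a b = true) (_hab : a ≤ b)
    (hbw : b < (g.headD "").toList.length)
    (s : String) (hsg : s ∈ g) (hsd : s ∈ g.dropLast) (r : Nat)
    (t u : Nat × Nat × Nat × List Char)
    (ht : t ∈ pvScan r 0 (s.toList.take (g.headD "").toList.length))
    (hu : u ∈ pvScan r 0 (s.toList.take (g.headD "").toList.length))
    (hta : a ≤ t.1) (htb : t.2.1 ≤ b) (hua : a ≤ u.1) (hub : u.2.1 ≤ b)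
    (htr : (PySem.Chars.strip t.2.2.2).isEmpty = false)
    (hur : (PySem.Chars.strip u.2.2.2).isEmpty = false) : t = u := by
  set w := (g.headD "").toList.length with hwdef
  set row := s.toList.take w with hrowdef
  have hrowlen : row.length = w := by
    rw [hrowdef, List.length_take]
    have := hlen s hsg
    omega
  have hclip : ∀ j, j < w → s.toList.getD j ' ' = row.getD j ' ' := by
    intro j hj
    rw [hrowdef, pv_getD_take _ _ _ _ hj]
  have main : ∀ (x y : Nat × Nat × Nat × List Char),
      x ∈ pvScan r 0 row → y ∈ pvScan r 0 row →
      a ≤ x.1 → x.2.1 ≤ b → a ≤ y.1 → y.2.1 ≤ b →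
      (PySem.Chars.strip x.2.2.2).isEmpty = false →
      (PySem.Chars.strip y.2.2.2).isEmpty = false →
      x.2.1 + 1 < y.1 → False := by
    intro x y hx hy hxa hxb hya hyb hxr hyr hrel
    obtain ⟨_, hxse, hxend, _, _, _⟩ := pv_scan_mem row r x hx
    obtain ⟨_, hyse, hyend, _, _, _⟩ := pv_scan_mem row r y hy
    have hmlt : x.2.1 + 1 < row.length := by omega
    have hmsp : row.getD (x.2.1 + 1) ' ' = ' ' := by
      by_contra hms
      obtain ⟨v, hv, hv1, hv2⟩ := pv_scan_cov row r (x.2.1 + 1) hmlt hms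
      obtain ⟨_, hvse, _, _, _, _⟩ := pv_scan_mem row r v hv
      have hvx : v ≠ x := by
        intro he
        rw [he] at hv1 hv2
        omega
      have hR := (pv_scan_pairwise row r).imp
        (fun {p q} (h : p.2.1 + 1 < q.1) => Or.inl h :
          ∀ {p q : Nat × Nat × Nat × List Char},
            p.2.1 + 1 < q.1 → (p.2.1 + 1 < q.1 ∨ q.2.1 + 1 < p.1))
      have hvxrel := List.Pairwise.forall
        (by intro p q h; exact h.symm) hR hv hx hvx
      rcases hvxrel with h | h
      · omega
      · omega
    obtain ⟨cx, hcxm, hcxs⟩ := pv_real_char x.2.2.2 hxr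
    obtain ⟨p, hp1, hp2, hp3⟩ := pv_token_char_pos row r x hx cx hcxm
    obtain ⟨cy, hcym, hcys⟩ := pv_real_char y.2.2.2 hyr
    obtain ⟨q, hq1, hq2, hq3⟩ := pv_token_char_pos row r y hy cy hcym
    exact pv_nosplit_extract g hns a b hblk (by omega) (by omega) s hsd
      (x.2.1 + 1) p q (by omega) (by omega)
      (by rw [hclip _ (by omega)]; exact hmsp)
      (by omega) (by omega)
      (by rw [hclip _ (by omega), hp3]; exact hcxs)
      (by omega) (by omega)
      (by rw [hclip _ (by omega), hq3]; exact hcys)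
  by_contra hne
  have hR := (pv_scan_pairwise row r).imp
    (fun {p q} (h : p.2.1 + 1 < q.1) => Or.inl h :
      ∀ {p q : Nat × Nat × Nat × List Char},
        p.2.1 + 1 < q.1 → (p.2.1 + 1 < q.1 ∨ q.2.1 + 1 < p.1))
  have := List.Pairwise.forall (by intro p q h; exact h.symm) hR ht hu hne
  rcases this with h | h
  · exact main t u ht hu hta htb hua hub htr hur h
  · exact main u t hu ht hua hub hta htb hur htr h

-- one row's contribution to a block: A's parse-the-stripped-slice equals B's tokens
theorem pv_row_val (g : List String) (hdom : Dom_part1 g)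
    (hlen : ∀ s ∈ g, (g.headD "").toList.length ≤ s.toList.length)
    (hns : pvNoSplit g = true)
    (a b : Nat) (hab : a ≤ b) (hbw : b < (g.headD "").toList.length)
    (hblk : pvIsBlock g a b = true)
    (hleft : a = 0 ∨ pvBlankCol ((pvColsOf (g.map (fun s => s.toList.take (g.headD "").toList.length))
        (g.headD "").toList.length).getD (a - 1) []) = true)
    (hright : b + 1 = (g.headD "").toList.length ∨
      pvBlankCol ((pvColsOf (g.map (fun s => s.toList.take (g.headD "").toList.length))
        (g.headD "").toList.length).getD (b + 1) []) = true)
    (s : String) (hsg : s ∈ g) (hsd : s ∈ g.dropLast) (r : Nat) :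
    (pvScan r 0 (s.toList.take (g.headD "").toList.length)).filterMap
      (fun t => if a ≤ t.1 ∧ t.1 ≤ b ∧ (PySem.Chars.strip t.2.2.2).isEmpty = false
                then some ((PySem.Int.ofChars? t.2.2.2).getD 0) else none)
    = (if (PySem.Chars.strip ((s.toList.drop a).take (b + 1 - a))).isEmpty
       then []
       else [(PySem.Int.ofChars? (PySem.Chars.strip ((s.toList.drop a).take (b + 1 - a)))).getD 0]) := by
  set w := (g.headD "").toList.length with hwdef
  set row := s.toList.take w with hrowdef
  have hrowlen : row.length = w := by
    rw [hrowdef, List.length_take]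
    have := hlen s hsg
    omega
  have hclipslice : (s.toList.drop a).take (b + 1 - a) = (row.drop a).take (b + 1 - a) :=
    pv_slice_clip s.toList w a b hbw
  have hwAll : ∀ row' ∈ g.map (fun s => s.toList.take w), row'.length = w := by
    intro row' hrow'
    obtain ⟨s', hs', rfl⟩ := List.mem_map.mp hrow'
    rw [List.length_take]
    have := hlen s' hs'
    omega
  have hR : row ∈ g.map (fun s => s.toList.take w) := List.mem_map.mpr ⟨s, hsg, rfl⟩
  have hTIR : ∀ t ∈ pvScan r 0 row, ∀ j, t.1 ≤ j → j ≤ t.2.1 → a ≤ j → j ≤ b →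
      a ≤ t.1 ∧ t.2.1 ≤ b := fun t ht j h1 h2 h3 h4 =>
    pv_token_in_run _ w hwAll a b hab hbw hleft hright row hR r t ht j h1 h2 h3 h4
  have hdomrow : ∀ c ∈ row, pvDomChar c = true := by
    intro c hc
    have hs' : pvDomStr s = true := by
      rw [Dom_part1, List.all_eq_true] at hdom
      exact hdom s hsg
    rw [pvDomStr, List.all_eq_true] at hs'
    exact hs' c (List.mem_of_mem_take hc)
  have hspace_ne : ∀ (c : Char), PySem.Chars.isspace c = false → ¬ c = ' ' := by
    intro c hc he
    rw [he] at hc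
    simp [PySem.Chars.isspace] at hc
  by_cases hex : ∃ t, t ∈ pvScan r 0 row ∧ a ≤ t.1 ∧ t.1 ≤ b ∧
      (PySem.Chars.strip t.2.2.2).isEmpty = false
  · obtain ⟨t0, ht0, h0a, h0b, h0r⟩ := hex
    obtain ⟨_, h0se, h0end, h0text, _, _⟩ := pv_scan_mem row r t0 ht0
    obtain ⟨_, h0bb⟩ := hTIR t0 ht0 t0.1 le_rfl h0se h0a h0b
    have huni : ∀ u ∈ pvScan r 0 row, a ≤ u.1 → u.1 ≤ b →
        (PySem.Chars.strip u.2.2.2).isEmpty = false → u = t0 := by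
      intro u hu h1 h2 h3
      obtain ⟨⟨_, hub⟩⟩ := And.intro (hTIR u hu u.1 le_rfl (pv_scan_mem row r u hu).2.1 h1 h2) trivial
      exact pv_unique_real g hlen hns a b hblk hab hbw s hsg hsd r u t0 hu ht0
        h1 hub h0a h0bb h3 h0r
    -- the other characters of the slice are whitespace
    have hseg : ∀ j, a ≤ j → j ≤ b → (j < t0.1 ∨ t0.2.1 < j) →
        PySem.Chars.isspace (row.getD j ' ') = true := by
      intro j h1 h2 h3
      by_contra hws
      rw [Bool.not_eq_true] at hws
      have hne := hspace_ne _ hws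
      obtain ⟨v, hv, hv1, hv2⟩ := pv_scan_cov row r j (by omega) hne
      obtain ⟨_, hvab⟩ := hTIR v hv j hv1 hv2 h1 h2
      have hva : a ≤ v.1 := (hTIR v hv j hv1 hv2 h1 h2).1
      have hvr : (PySem.Chars.strip v.2.2.2).isEmpty = false := by
        have hmem := pv_token_char row r v hv j hv1 hv2
        have := pv_strip_ne_nil v.2.2.2 _ hmem hws
        rwa [← List.isEmpty_eq_false_iff] at this
      have := huni v hv hva (by omega) hvr
      subst this
      omega
    have hstripeq : PySem.Chars.strip ((row.drop a).take (b + 1 - a))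
        = PySem.Chars.strip t0.2.2.2 := by
      rw [pv_slice_decomp row a t0.1 t0.2.1 b h0a h0se h0bb, ← h0text, ← List.append_assoc]
      rw [List.append_assoc]
      rw [← List.append_assoc]
      refine pv_strip_sandwich _ _ _ ?_ ?_
      · intro c hc
        rw [pv_mem_slice_iff row a (t0.1 - a) (by omega)] at hc
        obtain ⟨j, hj, he⟩ := hc
        rw [← he]
        exact hseg (a + j) (by omega) (by omega) (by omega)
      · intro c hc
        rw [pv_mem_slice_iff row (t0.2.1 + 1) (b - t0.2.1) (by omega)] at hc
        obtain ⟨j, hj, he⟩ := hc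
        rw [← he]
        exact hseg (t0.2.1 + 1 + j) (by omega) (by omega) (by omega)
    have hdomtext : ∀ c ∈ t0.2.2.2, pvDomChar c = true := by
      intro c hc
      rw [h0text] at hc
      exact hdomrow c (List.mem_of_mem_drop (List.mem_of_mem_take hc))
    have hval : PySem.Int.ofChars? (PySem.Chars.strip ((s.toList.drop a).take (b + 1 - a)))
        = PySem.Int.ofChars? t0.2.2.2 := by
      rw [hclipslice, hstripeq]
      exact pv_ofChars_strip t0.2.2.2 hdomtext
    rw [hclipslice, hstripeq, if_neg (by rw [h0r]; simp)]
    rw [← hstripeq, ← hclipslice, hval]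
    exact pv_filterMap_singleton _ t0 _ _ (pv_scan_nodup row r) ht0
      (by rw [if_pos ⟨h0a, h0b, h0r⟩]) (by
        intro u hu hne
        by_cases hp : a ≤ u.1 ∧ u.1 ≤ b ∧ (PySem.Chars.strip u.2.2.2).isEmpty = false
        · exact huni u hu hp.1 hp.2.1 hp.2.2
        · rw [if_neg hp] at hne
          exact absurd rfl hne)
  · have hall : ∀ j, a ≤ j → j ≤ b → PySem.Chars.isspace (row.getD j ' ') = true := by
      intro j h1 h2
      by_contra hws
      rw [Bool.not_eq_true] at hws
      have hne := hspace_ne _ hws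
      obtain ⟨v, hv, hv1, hv2⟩ := pv_scan_cov row r j (by omega) hne
      obtain ⟨hva, hvb⟩ := hTIR v hv j hv1 hv2 h1 h2
      have hvr : (PySem.Chars.strip v.2.2.2).isEmpty = false := by
        have hmem := pv_token_char row r v hv j hv1 hv2
        have := pv_strip_ne_nil v.2.2.2 _ hmem hws
        rwa [← List.isEmpty_eq_false_iff] at this
      exact hex ⟨v, hv, hva, by omega, hvr⟩
    have hstrip0 : PySem.Chars.strip ((row.drop a).take (b + 1 - a)) = [] := by
      apply pv_strip_all_space
      intro c hc
      rw [pv_mem_slice_iff row a (b + 1 - a) (by omega)] at hc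
      obtain ⟨j, hj, he⟩ := hc
      rw [← he]
      exact hall (a + j) (by omega) (by omega)
    rw [hclipslice, hstrip0, if_pos (by simp)]
    rw [List.filterMap_eq_nil_iff]
    intro t ht
    by_cases hp : a ≤ t.1 ∧ t.1 ≤ b ∧ (PySem.Chars.strip t.2.2.2).isEmpty = false
    · exact absurd ⟨t, ht, hp.1, hp.2.1, hp.2.2⟩ hex
    · rw [if_neg hp]

-- '+' in a block slice of a row is '+' in some token of that row inside the block
theorem pv_plus_iff (g : List String)
    (hlen : ∀ s ∈ g, (g.headD "").toList.length ≤ s.toList.length)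
    (a b : Nat) (hab : a ≤ b) (hbw : b < (g.headD "").toList.length)
    (hleft : a = 0 ∨ pvBlankCol ((pvColsOf (g.map (fun s => s.toList.take (g.headD "").toList.length))
        (g.headD "").toList.length).getD (a - 1) []) = true)
    (hright : b + 1 = (g.headD "").toList.length ∨
      pvBlankCol ((pvColsOf (g.map (fun s => s.toList.take (g.headD "").toList.length))
        (g.headD "").toList.length).getD (b + 1) []) = true)
    (s : String) (hsg : s ∈ g) (r : Nat) :
    '+' ∈ ((s.toList.drop a).take (b + 1 - a)) ↔
      ∃ t ∈ pvScan r 0 (s.toList.take (g.headD "").toList.length),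
        a ≤ t.1 ∧ t.1 ≤ b ∧ '+' ∈ t.2.2.2 := by
  set w := (g.headD "").toList.length with hwdef
  set row := s.toList.take w with hrowdef
  have hrowlen : row.length = w := by
    rw [hrowdef, List.length_take]
    have := hlen s hsg
    omega
  have hclipslice : (s.toList.drop a).take (b + 1 - a) = (row.drop a).take (b + 1 - a) :=
    pv_slice_clip s.toList w a b hbw
  have hwAll : ∀ row' ∈ g.map (fun s => s.toList.take w), row'.length = w := by
    intro row' hrow'
    obtain ⟨s', hs', rfl⟩ := List.mem_map.mp hrow'
    rw [List.length_take]
    have := hlen s' hs'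
    omega
  have hR : row ∈ g.map (fun s => s.toList.take w) := List.mem_map.mpr ⟨s, hsg, rfl⟩
  have hTIR : ∀ t ∈ pvScan r 0 row, ∀ j, t.1 ≤ j → j ≤ t.2.1 → a ≤ j → j ≤ b →
      a ≤ t.1 ∧ t.2.1 ≤ b := fun t ht j h1 h2 h3 h4 =>
    pv_token_in_run _ w hwAll a b hab hbw hleft hright row hR r t ht j h1 h2 h3 h4
  rw [hclipslice]
  constructor
  · intro hmem
    rw [pv_mem_slice_iff row a (b + 1 - a) (by omega)] at hmem
    obtain ⟨j, hj, he⟩ := hmem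
    have hne : ¬ row.getD (a + j) ' ' = ' ' := by
      rw [he]
      intro hc
      cases hc
    obtain ⟨v, hv, hv1, hv2⟩ := pv_scan_cov row r (a + j) (by omega) hne
    obtain ⟨hva, hvb⟩ := hTIR v hv (a + j) hv1 hv2 (by omega) (by omega)
    refine ⟨v, hv, hva, by omega, ?_⟩
    rw [← he]
    exact pv_token_char row r v hv (a + j) hv1 hv2
  · rintro ⟨t, ht, h1, h2, hplus⟩
    obtain ⟨j, hj1, hj2, hje⟩ := pv_token_char_pos row r t ht '+' hplus
    obtain ⟨_, htb⟩ := hTIR t ht t.1 le_rfl (pv_scan_mem row r t ht).2.1 h1 h2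
    rw [pv_mem_slice_iff row a (b + 1 - a) (by omega)]
    exact ⟨j - a, by omega, by rw [Nat.add_sub_cancel' (by omega : a ≤ j)]; exact hje⟩

-- the per-block summand of A (the body of its blocks loop)
def pvFA (rows : List (List Char)) : Int → Nat × Nat → Int := fun total ab =>
  let last := (PySem.List.pyGet? rows (-1)).getD []
  let op : Bool := ('+' ∈ PySem.List.slice last (some (ab.1 : Int)) (some ((ab.2 : Int) + 1)))
  let nums : List Int := (List.range (rows.length - 1)).filterMap (fun r =>
    let s := PySem.Chars.strip (PySem.List.slice (rows.getD r []) (some (ab.1 : Int)) (some ((ab.2 : Int) + 1)))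
    if s.isEmpty then none else some ((PySem.Int.ofChars? s).getD 0))
  total + (if op then nums.sum else nums.prod)

-- the per-block summand of B (the body of its blocks loop)
def pvFB (h : Nat) (toks : List (Nat × Nat × Nat × List Char)) : Int → Nat × Nat → Int :=
  fun total ab =>
    let nums : List Int := toks.filterMap (fun t =>
      if t.2.2.1 < h - 1 && ab.1 ≤ t.1 && t.1 ≤ ab.2 && !(PySem.Chars.strip t.2.2.2).isEmpty
      then some ((PySem.Int.ofChars? t.2.2.2).getD 0) else none)
    let plus := toks.any (fun t =>
      t.2.2.1 == h - 1 && decide (ab.1 ≤ t.1) && decide (t.1 ≤ ab.2) && decide ('+' ∈ t.2.2.2))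
    total + (if plus then nums.sum else nums.prod)

theorem pv_getD_map_str (f : String → List Char) (hf : f "" = []) (g : List String) (r : Nat) :
    (g.map f).getD r [] = f (g.getD r "") := by
  simp [List.getD_eq_getElem?_getD, List.getElem?_map]
  cases g[r]? <;> simp [hf]

-- on one run, A's slice-based summand equals B's token-based summand
theorem pv_run_eq (g : List String) (hdom : Dom_part1 g) (hg : g ≠ [])
    (hlen : ∀ s ∈ g, (g.headD "").toList.length ≤ s.toList.length)
    (hns : pvNoSplit g = true)
    (a b : Nat)
    (hab : a ≤ b) (hbw : b < (g.headD "").toList.length)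
    (hin : ∀ c, a ≤ c → c ≤ b →
      pvBlankCol ((pvColsOf (g.map (fun s => s.toList.take (g.headD "").toList.length))
        (g.headD "").toList.length).getD c []) = false)
    (hleft : a = 0 ∨ pvBlankCol ((pvColsOf (g.map (fun s => s.toList.take (g.headD "").toList.length))
        (g.headD "").toList.length).getD (a - 1) []) = true)
    (hright : b + 1 = (g.headD "").toList.length ∨
      pvBlankCol ((pvColsOf (g.map (fun s => s.toList.take (g.headD "").toList.length))
        (g.headD "").toList.length).getD (b + 1) []) = true)
    (total : Int) :
    pvFA (g.map String.toList) total (a, b)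
      = pvFB g.length
          (PySem.List.sorted (pvToks 0 (g.map (fun s => s.toList.take (g.headD "").toList.length)))
            (fun t => t.1) false) total (a, b) := by
  set w := (g.headD "").toList.length with hwdef
  set R := g.map (fun s => s.toList.take w) with hRdef
  set rows := g.map String.toList with hrowsdef
  set toks := pvToks 0 R with htoksdef
  set toksS := PySem.List.sorted toks (fun t => t.1) false with htoksSdef
  have hgpos : 0 < g.length := List.length_pos_iff.mpr hg
  have hrowsne : rows ≠ [] := by
    rw [hrowsdef]
    simp [hg]
  have hRlen : R.length = g.length := by rw [hRdef, List.length_map]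
  have hrowslen : rows.length = g.length := by rw [hrowsdef, List.length_map]
  have hblk : pvIsBlock g a b = true := pv_run_isBlock g a b ⟨hab, hbw, hin, hleft, hright⟩
  have hgetDrows : ∀ r, rows.getD r [] = (g.getD r "").toList := by
    intro r
    rw [hrowsdef]
    exact pv_getD_map_str String.toList rfl g r
  have hgetDR : ∀ r, R.getD r [] = (g.getD r "").toList.take w := by
    intro r
    rw [hRdef]
    exact pv_getD_map_str (fun s => s.toList.take w) (by simp) g r
  have hmemg : ∀ r, r < g.length → g.getD r "" ∈ g := by
    intro r hr
    rw [List.getD_eq_getElem?_getD, List.getElem?_eq_getElem hr]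
    exact List.getElem_mem hr
  have hmemdl : ∀ r, r < g.length - 1 → g.getD r "" ∈ g.dropLast := by
    intro r hr
    have hrd : r < g.dropLast.length := by rw [List.length_dropLast]; omega
    rw [List.getD_eq_getElem?_getD, List.getElem?_eq_getElem (by omega)]
    have := List.getElem_dropLast (xs := g) (i := r) hrd
    rw [← this]
    exact List.getElem_mem hrd
  have hcast : ∀ (X : List Char), PySem.List.slice X (some (a : Int)) (some ((b : Int) + 1))
      = (X.drop a).take (b + 1 - a) := by
    intro X
    rw [show ((b : Nat) : Int) + 1 = ((b + 1 : Nat) : Int) from by push_cast; ring,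
      PySem.List.slice_natCast]
  have hlast_eq : (PySem.List.pyGet? rows (-1)).getD [] = (g.getD (g.length - 1) "").toList := by
    rw [pv_pyGet_last rows hrowsne, hrowslen, hgetDrows]
  -- membership in toks, by the row of the token
  have htoksmem : ∀ t, t ∈ toks ↔ ∃ k, k < g.length ∧ t ∈ pvScan k 0 (R.getD k []) := by
    intro t
    rw [htoksdef, pv_mem_pvToks R 0 t, hRlen]
    constructor
    · rintro ⟨k, hk, h⟩
      exact ⟨k, hk, by rwa [Nat.zero_add] at h⟩
    · rintro ⟨k, hk, h⟩
      exact ⟨k, hk, by rwa [Nat.zero_add]⟩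
  -- op = plus
  have hplusiff := pv_plus_iff g hlen a b hab hbw hleft hright (g.getD (g.length - 1) "")
    (hmemg _ (by omega)) (g.length - 1)
  have hop : decide ('+' ∈ ((g.getD (g.length - 1) "").toList.drop a).take (b + 1 - a))
      = toksS.any (fun t =>
        t.2.2.1 == g.length - 1 && decide (a ≤ t.1) && decide (t.1 ≤ b) && decide ('+' ∈ t.2.2.2)) := by
    rw [Bool.eq_iff_iff, decide_eq_true_eq, List.any_eq_true]
    rw [hplusiff]
    constructor
    · rintro ⟨t, ht, h1, h2, h3⟩
      refine ⟨t, ?_, ?_⟩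
      · rw [htoksSdef, PySem.List.mem_sorted, htoksmem]
        refine ⟨g.length - 1, by omega, ?_⟩
        rwa [hgetDR]
      · have ht221 : t.2.2.1 = g.length - 1 := by
          have := (pv_scan_mem _ _ t ht).1
          exact this
        simp [ht221, h1, h2, h3]
    · rintro ⟨t, ht, hp⟩
      rw [htoksSdef, PySem.List.mem_sorted, htoksmem] at ht
      obtain ⟨k, hk, hts⟩ := ht
      have ht221 : t.2.2.1 = k := (pv_scan_mem _ _ t hts).1
      simp only [Bool.and_eq_true, beq_iff_eq, decide_eq_true_eq] at hp
      obtain ⟨⟨⟨hk1, h1⟩, h2⟩, h3⟩ := hp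
      rw [ht221] at hk1
      subst hk1
      exact ⟨t, by rwa [hgetDR] at hts, h1, h2, h3⟩
  -- nums are a permutation
  have hpermS : toksS.Perm toks := by
    rw [htoksSdef]
    exact PySem.List.sorted_perm toks (fun t => t.1) false
  have hnums : (toksS.filterMap (fun t =>
      if t.2.2.1 < g.length - 1 && a ≤ t.1 && t.1 ≤ b && !(PySem.Chars.strip t.2.2.2).isEmpty
      then some ((PySem.Int.ofChars? t.2.2.2).getD 0) else none)).Perm
      ((List.range (rows.length - 1)).filterMap (fun r =>
        let s := PySem.Chars.strip (PySem.List.slice (rows.getD r [])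
          (some (a : Int)) (some ((b : Int) + 1)))
        if s.isEmpty then none else some ((PySem.Int.ofChars? s).getD 0))) := by
    have hT := List.Perm.filterMap (fun t =>
      if t.2.2.1 < g.length - 1 && a ≤ t.1 && t.1 ≤ b && !(PySem.Chars.strip t.2.2.2).isEmpty
      then some ((PySem.Int.ofChars? t.2.2.2).getD 0) else none) hpermS
    refine hT.trans (List.Perm.of_eq ?_)
    rw [htoksdef, pv_toks_filterMap _ R 0, hRlen]
    -- split off the last row, whose tokens are all rejected
    have hsplitrange : List.range' 0 g.length = List.range' 0 (g.length - 1) ++ [g.length - 1] := by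
      have := List.range'_append (s := 0) (m := g.length - 1) (n := 1) (step := 1)
      rw [show 0 + 1 * (g.length - 1) = g.length - 1 from by omega] at this
      rw [show (g.length - 1) + 1 = g.length from by omega] at this
      rw [← this]
      rfl
    rw [hsplitrange, List.flatMap_append]
    have hlastnil : ([g.length - 1] : List Nat).flatMap (fun r =>
        (pvScan r 0 (R.getD (r - 0) [])).filterMap (fun t =>
          if t.2.2.1 < g.length - 1 && a ≤ t.1 && t.1 ≤ b && !(PySem.Chars.strip t.2.2.2).isEmpty
          then some ((PySem.Int.ofChars? t.2.2.2).getD 0) else none)) = [] := by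
      simp only [List.flatMap_cons, List.flatMap_nil, List.append_nil]
      rw [List.filterMap_eq_nil_iff]
      intro t ht
      have ht221 : t.2.2.1 = g.length - 1 := (pv_scan_mem _ _ t ht).1
      rw [if_neg]
      simp only [Bool.and_eq_true, decide_eq_true_eq, not_and]
      intro hlt
      omega
    rw [hlastnil, List.append_nil, hrowslen, List.range_eq_range']
    conv_rhs => rw [pv_filterMap_eq_flatMap_toList]
    apply pv_flatMap_congr
    intro r hr
    rw [List.mem_range'_1] at hr
    have hrlt : r < g.length - 1 := by omega
    rw [Nat.sub_zero, hgetDR]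
    have hrow := pv_row_val g hdom hlen hns a b hab hbw hblk hleft hright
      (g.getD r "") (hmemg r (by omega)) (hmemdl r hrlt) r
    have hcongr : (pvScan r 0 ((g.getD r "").toList.take w)).filterMap (fun t =>
        if t.2.2.1 < g.length - 1 && a ≤ t.1 && t.1 ≤ b && !(PySem.Chars.strip t.2.2.2).isEmpty
        then some ((PySem.Int.ofChars? t.2.2.2).getD 0) else none)
        = (pvScan r 0 ((g.getD r "").toList.take w)).filterMap (fun t =>
        if a ≤ t.1 ∧ t.1 ≤ b ∧ (PySem.Chars.strip t.2.2.2).isEmpty = false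
        then some ((PySem.Int.ofChars? t.2.2.2).getD 0) else none) := by
      apply List.filterMap_congr
      intro t ht
      have ht221 : t.2.2.1 = r := (pv_scan_mem _ _ t ht).1
      by_cases hp : a ≤ t.1 ∧ t.1 ≤ b ∧ (PySem.Chars.strip t.2.2.2).isEmpty = false
      · rw [if_pos hp, if_pos]
        simp only [Bool.and_eq_true, decide_eq_true_eq]
        exact ⟨⟨⟨by omega, hp.1⟩, hp.2.1⟩, by rw [hp.2.2]; rfl⟩
      · rw [if_neg hp, if_neg]
        intro hcc
        simp only [Bool.and_eq_true, decide_eq_true_eq] at hcc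
        exact hp ⟨hcc.1.1.2, hcc.1.2, by simpa using hcc.2⟩
    rw [hcongr, hrow, hgetDrows, hcast]
    dsimp only
    by_cases hie : (PySem.Chars.strip (((g.getD r "").toList.drop a).take (b + 1 - a))).isEmpty
    · rw [if_pos hie, if_pos hie]
      rfl
    · rw [if_neg hie, if_neg hie]
      rfl
  -- assemble
  simp only [pvFA, pvFB]
  rw [hlast_eq]
  rw [hcast]
  rw [hop]
  by_cases hpl : toksS.any (fun t =>
      t.2.2.1 == g.length - 1 && decide (a ≤ t.1) && decide (t.1 ≤ b) && decide ('+' ∈ t.2.2.2)) = true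
  · rw [hpl, if_pos rfl, if_pos rfl]
    congr 1
    exact (hnums.sum_eq).symm
  · rw [Bool.not_eq_true] at hpl
    rw [hpl, if_neg (by simp), if_neg (by simp)]
    congr 1
    exact (hnums.prod_eq).symm

-- ===== VERDICT (by name: the statement is the Claim_ definition above) =====
theorem part1_spec : Claim_equal_part1 := by
  unfold Claim_equal_part1
  intro g hdom hpre
  unfold Spec_part1
  obtain ⟨hg, hlenp, hparse, hnosplit⟩ := hpre
  have hgpos : 0 < g.length := List.length_pos_iff.mpr hg
  simp only [part1, part1_alt]
  set rows := g.map String.toList with hrowsdef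
  set w0 := (g.headD "").toList.length with hw0def
  set R := g.map (fun s => s.toList.take w0) with hRdef
  set cols := pvColsOf R w0 with hcolsdef
  set toks := pvToks 0 R with htoksdef
  set toksS := PySem.List.sorted toks (fun t => t.1) false with htoksSdef
  set runs := pvRuns 0 cols with hrunsdef
  have hrowsne : rows ≠ [] := by
    rw [hrowsdef]
    simp [hg]
  have hhead : (rows.headD []).length = w0 := by
    cases g with
    | nil => exact absurd rfl hg
    | cons s gs => simp [hrowsdef, hw0def]
  have hcolslen : cols.length = w0 := by
    rw [hcolsdef, pvColsOf, List.length_map, List.length_range]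
  have hRlen : R.length = g.length := by rw [hRdef, List.length_map]
  have hwAll : ∀ row' ∈ R, row'.length = w0 := by
    intro row' hrow'
    rw [hRdef] at hrow'
    obtain ⟨s', hs', rfl⟩ := List.mem_map.mp hrow'
    rw [List.length_take]
    have := hlenp s' hs'
    omega
  have hgetDR : ∀ r, R.getD r [] = (g.getD r "").toList.take w0 := by
    intro r
    rw [hRdef]
    exact pv_getD_map_str (fun s => s.toList.take w0) (by simp) g r
  -- the column mask A computes is the blank map of the clipped columns
  have hmaskeq : (List.range w0).map (fun c => rows.all (fun r => r.getD c ' ' == ' '))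
      = cols.map pvBlankCol := by
    rw [hcolsdef, pvColsOf, List.map_map]
    apply List.map_congr_left
    intro c hc
    rw [List.mem_range] at hc
    simp only [pvBlankCol, List.all_map, hRdef, hrowsdef, Function.comp]
    refine List.all_congr rfl ?_
    intro s
    simp only [Function.comp_apply]
    rw [pv_getD_take _ _ _ _ hc]
  have hmlen : (cols.map pvBlankCol).length = w0 := by
    rw [List.length_map, hcolslen]
  -- runs spec
  obtain ⟨hmemspec, hcovspec, hchainspec⟩ := pv_runs_spec cols.length cols le_rfl 0
  rw [← hrunsdef] at hmemspec hcovspec hchainspec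
  -- merge: B's blocks are the runs
  have hsorted : toksS.Pairwise (fun t u => t.1 ≤ u.1) := by
    rw [htoksSdef]
    exact PySem.List.sorted_pairwise toks (fun t => t.1)
  have htoksmem : ∀ t, t ∈ toksS ↔ ∃ k, k < g.length ∧ t ∈ pvScan k 0 (R.getD k []) := by
    intro t
    rw [htoksSdef, PySem.List.mem_sorted, htoksdef, pv_mem_pvToks R 0 t, hRlen]
    constructor
    · rintro ⟨k, hk, h⟩
      exact ⟨k, hk, by rwa [Nat.zero_add] at h⟩
    · rintro ⟨k, hk, h⟩
      exact ⟨k, hk, by rwa [Nat.zero_add]⟩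
  have hblocks : (toksS.foldl pvMergeStep []).reverse = runs := by
    have hfold := pv_merge runs toksS [] hsorted
      (by
        intro t ht
        obtain ⟨k, hk, hts⟩ := (htoksmem t).mp ht
        obtain ⟨_, hse, hend, _, hns', _⟩ := pv_scan_mem _ _ t hts
        have hrowmem : R.getD k [] ∈ R := by
          rw [List.getD_eq_getElem?_getD, List.getElem?_eq_getElem (by omega : k < R.length)]
          exact List.getElem_mem _
        have hrowlen : (R.getD k []).length = w0 := hwAll _ hrowmem
        have hblankf : pvBlankCol (cols.getD t.1 []) = false := by
          rw [hcolsdef]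
          exact (pv_blank_false_iff R w0 t.1 (by omega)).mpr
            ⟨R.getD k [], hrowmem, hns' t.1 le_rfl hse⟩
        obtain ⟨ab, habr, hc1, hc2⟩ := hcovspec t.1 (by omega) hblankf
        rw [Nat.zero_add] at hc1 hc2
        obtain ⟨_, habse, habw, _, hableft, habright⟩ := hmemspec ab habr
        have hTIR := pv_token_in_run R w0 hwAll ab.1 ab.2 habse
          (by omega)
          (by
            rcases hableft with h | h
            · left; exact h
            · right; rw [← hcolsdef]; rwa [Nat.sub_zero] at h)
          (by
            rcases habright with h | h
            · left; rw [Nat.zero_add, hcolslen] at h; exact h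
            · right; rw [← hcolsdef]; rwa [Nat.sub_zero] at h)
          (R.getD k []) hrowmem k t hts t.1 le_rfl hse hc1 hc2
        exact ⟨hse, ab, habr, hTIR.1, hTIR.2⟩)
      (by
        intro ab habr c h1 h2
        obtain ⟨_, habse, habw, habin, _, _⟩ := hmemspec ab habr
        have hblankf := habin c h1 h2
        rw [Nat.sub_zero] at hblankf
        rw [hcolsdef] at hblankf
        have hcw : c < w0 := by
          rw [Nat.zero_add, hcolslen] at habw
          omega
        obtain ⟨row', hrow', hne⟩ := (pv_blank_false_iff R w0 c hcw).mp hblankf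
        obtain ⟨k, hkR, hEq⟩ := List.mem_iff_getElem.mp hrow'
        have hrowD : R.getD k [] = row' := by
          rw [List.getD_eq_getElem?_getD, List.getElem?_eq_getElem hkR, hEq]
          rfl
        have hclen : c < row'.length := by
          rw [hwAll row' hrow']
          exact hcw
        obtain ⟨t, hts, ht1, ht2⟩ := pv_scan_cov row' k c hclen hne
        refine ⟨t, ?_, ht1, ht2⟩
        rw [htoksmem]
        exact ⟨k, by omega, by rwa [hrowD]⟩)
      hchainspec
      (fun ab habr => (hmemspec ab habr).2.1)
      (fun hd rest he ab habr => absurd he (by simp))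
    rw [hfold, List.append_nil, List.reverse_reverse]
  -- A's state machine produces the runs
  rw [hhead, hmaskeq, ← hmlen]
  rw [show List.range ((cols.map pvBlankCol).length) = List.range' 0 ((cols.map pvBlankCol).length)
    from List.range_eq_range']
  rw [pv_foldl_go (cols.map pvBlankCol) (cols.map pvBlankCol).length 0
    (([], false, 0) : List (Nat × Nat) × Bool × Nat) (Nat.sub_zero _).symm (Nat.zero_le _)]
  rw [List.drop_zero, (pv_go_runs cols.length cols le_rfl).1 0 [] 0, List.nil_append]
  rw [← hrunsdef, hblocks]
  -- per-run equality of the two summands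
  refine PySem.List.foldl_congr_mem runs _ _ 0 ?_
  intro acc ab habr
  obtain ⟨a, b⟩ := ab
  obtain ⟨_, habse, habw, habin, hableft, habright⟩ := hmemspec (a, b) habr
  rw [Nat.zero_add, hcolslen] at habw
  have hrun := pv_run_eq g hdom hg hlenp hnosplit a b habse habw
    (by
      intro c h1 h2
      have := habin c h1 h2
      rwa [Nat.sub_zero, hcolsdef] at this)
    (by
      rcases hableft with h | h
      · left; exact h
      · right; rwa [Nat.sub_zero, hcolsdef] at h)
    (by
      rcases habright with h | h
      · left; rw [Nat.zero_add, hcolslen] at h; exact h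
      · right; rwa [Nat.sub_zero, hcolsdef] at h)
    acc
  exact hrun
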